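-- pv_equiv track=rewrite | github.com/woori9/algo_rhythm | bfs/무인도여행/s1.py | solution
-- ===== SOURCE A (Python) =====
-- from collections import deque
--
-- d = [(0, 1), (1, 0), (0, -1), (-1, 0)]
--
-- def solution(maps):
--     answer = []
--     queue = deque([])
--     visited = [[0] * len(maps[0]) for _ in range(len(maps))]
--
--     for i in range(len(maps)):
--         for j in range(len(maps[0])):
--             if maps[i][j] != 'X' and not visited[i][j]:
--                 queue.append((i, j))
--                 visited[i][j] = 1
--                 food = 0
--
--                 while queue:
--                     x, y = queue.popleft()
--                     food += int(maps[x][y])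
--
--                     for k in range(4):
--                         nx, ny = x + d[k][0], y + d[k][1]
--
--                         if 0 <= nx < len(maps) and 0 <= ny < len(maps[0]):
--                             if maps[nx][ny] != 'X' and not visited[nx][ny]:
--                                 queue.append((nx, ny))
--                                 visited[nx][ny] = 1
--
--                 answer.append(food)
--
--     answer.sort()
--     return answer or [-1]
-- ===== SOURCE B (Python) =====
-- def solution(maps):
--     rows, cols = len(maps), len(maps[0])
--     n = rows * cols
--     parent = list(range(n))
--
--     def find(a):
--         while parent[a] != a:
--             a = parent[a]
--         return a
--
--     def union(a, b):
--         ra, rb = find(a), find(b)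
--         if ra == rb:
--             return
--         if ra < rb:
--             parent[rb] = ra
--         else:
--             parent[ra] = rb
--
--     for i in range(rows):
--         for j in range(cols):
--             if maps[i][j] != 'X':
--                 if i + 1 < rows and maps[i + 1][j] != 'X':
--                     union(i * cols + j, (i + 1) * cols + j)
--                 if j + 1 < cols and maps[i][j + 1] != 'X':
--                     union(i * cols + j, i * cols + j + 1)
--
--     sums = {}
--     for i in range(rows):
--         for j in range(cols):
--             if maps[i][j] != 'X':
--                 r = find(i * cols + j)
--                 sums[r] = sums.get(r, 0) + int(maps[i][j])
--
--     answer = sorted(sums.values())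
--     return answer or [-1]
-- ===== Notes on version B (the rewrite author's own statement) =====
-- stated objective: alternative
-- what changed: A's per-component BFS flood fill with a FIFO queue and a visited grid is replaced by a disjoint-set (union-find) forest over linear cell indices: one pass unions each land cell with its right/down land neighbours (union by smaller root, no visited structure, no queue), and a second pass accumulates each cell's value into a dict keyed by its root; the sorted dict values are the island sums.
-- outside the precondition, e.g. on solution([]): A returns [-1], B raises IndexError; on solution(['12', '3']): A raises IndexError, B raises IndexError; on solution(['1a']): A raises ValueError, B raises ValueError
import Mathlib
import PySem

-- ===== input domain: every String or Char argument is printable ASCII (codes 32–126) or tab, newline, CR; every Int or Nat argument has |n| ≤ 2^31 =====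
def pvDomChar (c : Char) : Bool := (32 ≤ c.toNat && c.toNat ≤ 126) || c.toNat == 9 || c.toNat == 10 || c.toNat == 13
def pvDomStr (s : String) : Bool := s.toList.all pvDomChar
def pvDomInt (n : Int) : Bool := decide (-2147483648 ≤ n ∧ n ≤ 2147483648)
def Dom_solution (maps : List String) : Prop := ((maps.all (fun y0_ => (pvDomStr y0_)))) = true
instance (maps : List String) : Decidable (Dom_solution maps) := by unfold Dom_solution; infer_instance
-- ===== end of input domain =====

-- B replaces A's FIFO-queue BFS flood fill (visited grid, per-component queue loop) by a
-- disjoint-set forest (union-find, union by smaller root) over linear cell indices plus a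
-- dict keyed by each cell's root; same asymptotic cost, a genuinely different algorithm.

-- ===== PORT A =====
-- Shared grid accessors.  Every indexing below is guarded by 0 ≤ · < rows/cols at its
-- use site (Python would raise otherwise, excluded by Pre_), so getD/toNat are exact there.
def rowsI (maps : List String) : Int := (maps.length : Int)

def colsI (maps : List String) : Int := ((maps.headD "").toList.length : Int)

def cellChar (maps : List String) (x y : Int) : Char :=
  (maps.getD x.toNat "").toList.getD y.toNat ' '

def valAt (maps : List String) (x y : Int) : Int :=
  (PySem.Int.ofChars? [cellChar maps x y]).getD 0

-- visited[x][y] of A's 0/1 grid; `none` = the index does not exist (never on A's own states)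
def entry? (V : List (List Int)) (x y : Int) : Option Int :=
  (V[x.toNat]?).bind (fun r => r[y.toNat]?)

-- visited[x][y] = 1
def markCell (V : List (List Int)) (x y : Int) : List (List Int) :=
  V.set x.toNat ((V.getD x.toNat []).set y.toNat 1)

-- termination measure for A's while loop (cited by bfsLoop's decreasing_by)
def zeroCount (V : List (List Int)) : Nat := (V.map (fun r => r.count 0)).sum

lemma count_set_zero : ∀ (r : List Int) (j : Nat), r[j]? = some 0 →
    (r.set j 1).count 0 + 1 = r.count 0 := by
  intro r
  induction r with
  | nil => intro j h; simp at h
  | cons a t ih =>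
    intro j h
    cases j with
    | zero =>
      simp only [List.getElem?_cons_zero, Option.some.injEq] at h
      subst h
      simp
    | succ j =>
      simp only [List.getElem?_cons_succ] at h
      simp only [List.set_cons_succ, List.count_cons]
      have := ih j h
      omega

lemma zeroCount_set : ∀ (V : List (List Int)) (i : Nat) (row r' : List Int),
    V[i]? = some row → zeroCount (V.set i r') + row.count 0 = zeroCount V + r'.count 0 := by
  intro V
  induction V with
  | nil => intro i row r' h; simp at h
  | cons v t ih =>
    intro i row r' h
    cases i with
    | zero =>
      simp only [List.getElem?_cons_zero, Option.some.injEq] at h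
      subst h
      simp [zeroCount]
      omega
    | succ i =>
      simp only [List.getElem?_cons_succ] at h
      simp only [List.set_cons_succ, zeroCount, List.map_cons, List.sum_cons]
      have := ih i row r' h
      simp only [zeroCount] at this
      omega

lemma mark_zeroCount (V : List (List Int)) (x y : Int) (h : entry? V x y = some 0) :
    zeroCount (markCell V x y) + 1 = zeroCount V := by
  unfold entry? at h
  cases hrow : V[x.toNat]? with
  | none => rw [hrow] at h; simp at h
  | some row =>
    rw [hrow] at h
    simp only [Option.bind_some] at h
    have hget : V.getD x.toNat [] = row := by
      rw [List.getD_eq_getElem?_getD, hrow]; rfl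
    unfold markCell
    rw [hget]
    have h1 := zeroCount_set V x.toNat row (row.set y.toNat 1) hrow
    have h2 := count_set_zero row y.toNat h
    omega

def dList : List (Int × Int) := [(0, 1), (1, 0), (0, -1), (-1, 0)]

-- the body of A's `for k in range(4)` neighbour loop
def pushStep (maps : List String) (x y : Int)
    (st : List (Int × Int) × List (List Int)) (off : Int × Int) :
    List (Int × Int) × List (List Int) :=
  if 0 ≤ x + off.1 ∧ x + off.1 < rowsI maps ∧ 0 ≤ y + off.2 ∧ y + off.2 < colsI maps then
    if cellChar maps (x + off.1) (y + off.2) ≠ 'X' ∧ entry? st.2 (x + off.1) (y + off.2) = some 0 then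
      (st.1 ++ [(x + off.1, y + off.2)], markCell st.2 (x + off.1) (y + off.2))
    else st
  else st

lemma pushStep_cases (maps : List String) (x y : Int) (off : Int × Int)
    (q : List (Int × Int)) (V : List (List Int)) :
    pushStep maps x y (q, V) off = (q, V) ∨
    (entry? V (x + off.1) (y + off.2) = some 0 ∧
      pushStep maps x y (q, V) off =
        (q ++ [(x + off.1, y + off.2)], markCell V (x + off.1) (y + off.2))) := by
  unfold pushStep
  split
  · split
    · rename_i hg
      exact Or.inr ⟨hg.2, rfl⟩
    · exact Or.inl rfl
  · exact Or.inl rfl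

lemma pushMeasure (maps : List String) (x y : Int) :
    ∀ (offs : List (Int × Int)) (q : List (Int × Int)) (V : List (List Int)),
      2 * zeroCount (offs.foldl (pushStep maps x y) (q, V)).2 +
        (offs.foldl (pushStep maps x y) (q, V)).1.length ≤ 2 * zeroCount V + q.length := by
  intro offs
  induction offs with
  | nil => intro q V; simp
  | cons off offs ih =>
    intro q V
    simp only [List.foldl_cons]
    rcases pushStep_cases maps x y off q V with hcase | ⟨hg, hcase⟩
    · rw [hcase]; exact ih q V
    · rw [hcase]
      have hm := mark_zeroCount V (x + off.1) (y + off.2) hg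
      have := ih (q ++ [(x + off.1, y + off.2)]) (markCell V (x + off.1) (y + off.2))
      simp only [List.length_append, List.length_cons, List.length_nil] at this ⊢
      omega

-- A's `while queue:` loop; terminates because every push turns a 0 entry into 1
def bfsLoop (maps : List String) (queue : List (Int × Int)) (visited : List (List Int))
    (food : Int) : Int × List (List Int) :=
  match queue with
  | [] => (food, visited)
  | (x, y) :: rest =>
    let food' := food + valAt maps x y
    let st := dList.foldl (pushStep maps x y) (rest, visited)
    bfsLoop maps st.1 st.2 food'
termination_by 2 * zeroCount visited + queue.length
decreasing_by
  have := pushMeasure maps x y dList rest visited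
  simp only [List.length_cons]
  omega

def stepA (maps : List String) (i : Int) (st : List Int × List (List Int)) (j : Int) :
    List Int × List (List Int) :=
  if cellChar maps i j ≠ 'X' ∧ entry? st.2 i j = some 0 then
    let r := bfsLoop maps [(i, j)] (markCell st.2 i j) 0
    (st.1 ++ [r.1], r.2)
  else st

def rowA (maps : List String) (st : List Int × List (List Int)) (i : Int) :
    List Int × List (List Int) :=
  (PySem.List.pyRange 0 (colsI maps) 1).foldl (stepA maps i) st

def solution (maps : List String) : List Int :=
  let res := (PySem.List.pyRange 0 (rowsI maps) 1).foldl (rowA maps)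
    (([] : List Int), List.replicate maps.length (List.replicate (maps.headD "").toList.length 0))
  let ans := PySem.List.sorted res.1 (fun v => v) false
  if ans = [] then [-1] else ans

-- ===== PORT B =====
-- B: union-find over linear indices i*cols+j, then a dict of per-root sums.
def nTot (maps : List String) : Int := rowsI maps * colsI maps

-- `while parent[a] != a: a = parent[a]`.  The fuel `len(parent)` is a totality guard only:
-- on every parent list B builds, parents strictly decrease, so the loop stops within
-- len(parent) steps and the fuel is never exhausted.
def findFuel (p : List Int) : Nat → Int → Int
  | 0, a => a
  | k + 1, a =>
    -- parent[a]; the index is always in range on the states B builds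
    if (PySem.List.pyGet? p a).getD a = a then a
    else findFuel p k ((PySem.List.pyGet? p a).getD a)

def findP (p : List Int) (a : Int) : Int := findFuel p p.length a

def unionP (p : List Int) (a b : Int) : List Int :=
  let ra := findP p a
  let rb := findP p b
  if ra = rb then p
  else if ra < rb then PySem.List.pySetD p rb ra
  else PySem.List.pySetD p ra rb

-- the body of B's first (union) double loop, one cell
def uCell (maps : List String) (p : List Int) (i j : Int) : List Int :=
  if cellChar maps i j ≠ 'X' then
    let p1 := if i + 1 < rowsI maps ∧ cellChar maps (i + 1) j ≠ 'X' then
        unionP p (i * colsI maps + j) ((i + 1) * colsI maps + j) else p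
    if j + 1 < colsI maps ∧ cellChar maps i (j + 1) ≠ 'X' then
        unionP p1 (i * colsI maps + j) (i * colsI maps + j + 1) else p1
  else p

def parentFinal (maps : List String) : List Int :=
  (PySem.List.pyRange 0 (rowsI maps) 1).foldl
    (fun p i => (PySem.List.pyRange 0 (colsI maps) 1).foldl (fun p j => uCell maps p i j) p)
    (PySem.List.pyRange 0 (nTot maps) 1)

-- the body of B's second (sum) double loop, one cell
def sCell (maps : List String) (p : List Int) (d : PySem.Dict Int Int) (i j : Int) :
    PySem.Dict Int Int :=
  if cellChar maps i j ≠ 'X' then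
    let r := findP p (i * colsI maps + j)
    d.insert r (d.getD r 0 + valAt maps i j)
  else d

def solution_alt (maps : List String) : List Int :=
  let p := parentFinal maps
  let d := (PySem.List.pyRange 0 (rowsI maps) 1).foldl
    (fun d i => (PySem.List.pyRange 0 (colsI maps) 1).foldl (fun d j => sCell maps p d i j) d)
    PySem.Dict.empty
  let ans := PySem.List.sorted d.values (fun v => v) false
  if ans = [] then [-1] else ans

-- ===== PRECONDITION & SPEC =====
-- Pre_ excludes the inputs where Python A raises — a row shorter than the first row
-- (IndexError on maps[i][j]) and any scanned character that is neither a digit nor 'X'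
-- (ValueError in int(...)) — and the empty list, where A happens to return [-1] (it never
-- evaluates len(maps[0])) while B's natural n = rows*cols setup raises IndexError.
def Pre_solution (maps : List String) : Prop :=
  maps ≠ [] ∧ ∀ s ∈ maps, (maps.headD "").toList.length ≤ s.toList.length ∧
    ∀ j < (maps.headD "").toList.length,
      s.toList.getD j ' ' = 'X' ∨ (s.toList.getD j ' ').isDigit = true

instance (maps : List String) : Decidable (Pre_solution maps) := by
  unfold Pre_solution; infer_instance

def pvWitness_solution : List String := ["1X", "X2"]

def Spec_solution (maps : List String) (out : List Int) : Prop := out = solution_alt maps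
instance (maps : List String) (out : List Int) : Decidable (Spec_solution maps out) := by
  unfold Spec_solution; infer_instance

-- ===== CLAIM (what is proved, stated in full; the proofs are below) =====
def Claim_equal_solution : Prop :=
  ∀ (maps : List String), Dom_solution maps → Pre_solution maps → Spec_solution maps (solution maps)

-- ===== LEMMAS AND PROOFS =====

-- an in-bounds, non-'X' cell
def okC (maps : List String) (c : Int × Int) : Prop :=
  0 ≤ c.1 ∧ c.1 < rowsI maps ∧ 0 ≤ c.2 ∧ c.2 < colsI maps ∧ cellChar maps c.1 c.2 ≠ 'X'

-- 4-neighbourhood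
def adjC (c n : Int × Int) : Prop :=
  (n.1 = c.1 ∧ (n.2 = c.2 + 1 ∨ n.2 = c.2 - 1)) ∨
  (n.2 = c.2 ∧ (n.1 = c.1 + 1 ∨ n.1 = c.1 - 1))

-- one move between adjacent land cells, and its reflexive-transitive closure
def connStep (maps : List String) (a b : Int × Int) : Prop :=
  okC maps a ∧ okC maps b ∧ adjC a b

def Conn (maps : List String) : (Int × Int) → (Int × Int) → Prop :=
  Relation.ReflTransGen (connStep maps)

def gridF (maps : List String) : Finset (Int × Int) :=
  (Finset.range maps.length ×ˢ Finset.range (maps.headD "").toList.length).image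
    (fun p => ((p.1 : Int), (p.2 : Int)))

noncomputable def compF (maps : List String) (c : Int × Int) : Finset (Int × Int) :=
  @Finset.filter _ (fun z => Conn maps c z) (Classical.decPred _) (gridF maps)

noncomputable def csum (maps : List String) (c : Int × Int) : Int :=
  ∑ z ∈ compF maps c, valAt maps z.1 z.2

-- the flat scan order of both programs' double loops
def cells (maps : List String) : List (Int × Int) :=
  (PySem.List.pyRange 0 (rowsI maps) 1).flatMap
    (fun i => (PySem.List.pyRange 0 (colsI maps) 1).map (fun j => (i, j)))

-- the scan-order leaders: land cells not connected to any earlier scanned land cell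
noncomputable def leadAux (maps : List String) :
    List (Int × Int) → List (Int × Int) → List (Int × Int)
  | _, [] => []
  | seen, c :: t =>
    @ite _ (okC maps c) (Classical.propDecidable _)
      (@ite _ (∃ d ∈ seen, Conn maps d c) (Classical.propDecidable _)
        (leadAux maps (c :: seen) t)
        (c :: leadAux maps (c :: seen) t))
      (leadAux maps seen t)

def idxI (maps : List String) (c : Int × Int) : Int := c.1 * colsI maps + c.2

-- "indices v and w name connected land cells (or are equal)"
def connIdx (maps : List String) (v w : Int) : Prop :=
  v = w ∨ ∃ c d, okC maps c ∧ okC maps d ∧ Conn maps c d ∧ idxI maps c = v ∧ idxI maps d = w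

-- invariant of B's parent list
def InvP (maps : List String) (p : List Int) : Prop :=
  p.length = (nTot maps).toNat ∧ ∀ k : Nat, k < (nTot maps).toNat →
    ∃ v : Int, p[k]? = some v ∧ 0 ≤ v ∧ v ≤ (k : Int) ∧ connIdx maps v (k : Int)

-- ---- basic grid facts ----
lemma mem_gridF (maps : List String) (z : Int × Int) :
    z ∈ gridF maps ↔ 0 ≤ z.1 ∧ z.1 < rowsI maps ∧ 0 ≤ z.2 ∧ z.2 < colsI maps := by
  obtain ⟨a, b⟩ := z
  simp only [gridF, rowsI, colsI, Finset.mem_image, Finset.mem_product, Finset.mem_range,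
    Prod.exists, Prod.mk.injEq]
  constructor
  · rintro ⟨p, q, ⟨hp, hq⟩, rfl, rfl⟩
    exact ⟨Int.natCast_nonneg p, by exact_mod_cast hp, Int.natCast_nonneg q, by exact_mod_cast hq⟩
  · rintro ⟨ha, hr, hb, hc⟩
    exact ⟨a.toNat, b.toNat, ⟨by omega, by omega⟩, by omega, by omega⟩

lemma okC_mem_gridF {maps : List String} {c : Int × Int} (h : okC maps c) : c ∈ gridF maps := by
  rw [mem_gridF]; exact ⟨h.1, h.2.1, h.2.2.1, h.2.2.2.1⟩

lemma adjC_symm {c n : Int × Int} (h : adjC c n) : adjC n c := by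
  rcases h with ⟨h1, h2 | h2⟩ | ⟨h1, h2 | h2⟩
  · exact Or.inl ⟨h1.symm, Or.inr (by omega)⟩
  · exact Or.inl ⟨h1.symm, Or.inl (by omega)⟩
  · exact Or.inr ⟨h1.symm, Or.inr (by omega)⟩
  · exact Or.inr ⟨h1.symm, Or.inl (by omega)⟩

lemma conn_symm {maps : List String} {a b : Int × Int} (h : Conn maps a b) : Conn maps b a :=
  Relation.ReflTransGen.symmetric
    (fun _ _ hs => ⟨hs.2.1, hs.1, adjC_symm hs.2.2⟩) h

lemma conn_trans {maps : List String} {a b c : Int × Int}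
    (h1 : Conn maps a b) (h2 : Conn maps b c) : Conn maps a c :=
  Relation.ReflTransGen.trans h1 h2

lemma conn_ok_end {maps : List String} {c z : Int × Int} (h : Conn maps c z) (hc : okC maps c) :
    okC maps z := by
  induction h with
  | refl => exact hc
  | tail _ hs _ => exact hs.2.1

lemma mem_compF {maps : List String} {c z : Int × Int} (hok : okC maps c) :
    z ∈ compF maps c ↔ Conn maps c z := by
  unfold compF
  rw [@Finset.mem_filter _ _ (Classical.decPred _)]
  constructor
  · exact fun h => h.2
  · intro h
    exact ⟨okC_mem_gridF (conn_ok_end h hok), h⟩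

-- ---- A-side: reachability of the worklist machinery ----
-- cells reachable from a start through ok cells avoiding U (the start is not checked here)
inductive Reach (maps : List String) (U : Finset (Int × Int)) : (Int × Int) → (Int × Int) → Prop
  | refl (c : Int × Int) : Reach maps U c c
  | step {a b c : Int × Int} :
      Reach maps U a b → adjC b c → okC maps c → c ∉ U → Reach maps U a c

-- z lies in the part of the grid a worklist w still has to flood, avoiding U
def RSmem (maps : List String) (w : List (Int × Int)) (U : Finset (Int × Int))
    (z : Int × Int) : Prop :=
  ∃ c ∈ w, okC maps c ∧ c ∉ U ∧ Reach maps U c z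

noncomputable def rsF (maps : List String) (w : List (Int × Int)) (U : Finset (Int × Int)) :
    Finset (Int × Int) :=
  @Finset.filter _ (RSmem maps w U) (Classical.decPred _) (gridF maps)

noncomputable def compSum (maps : List String) (w : List (Int × Int)) (U : Finset (Int × Int)) :
    Int :=
  ∑ z ∈ rsF maps w U, valAt maps z.1 z.2

-- the set of marked cells of A's visited grid
def gsetV (maps : List String) (V : List (List Int)) : Finset (Int × Int) :=
  (gridF maps).filter (fun z => ¬ (entry? V z.1 z.2 = some 0))

lemma reach_ok_end {maps U} {c z : Int × Int} (h : Reach maps U c z) (hc : okC maps c) :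
    okC maps z := by
  induction h with
  | refl => exact hc
  | step _ _ hok _ _ => exact hok

lemma reach_notU_end {maps U} {c z : Int × Int} (h : Reach maps U c z) (hc : c ∉ U) :
    z ∉ U := by
  induction h with
  | refl => exact hc
  | step _ _ _ hU _ => exact hU

lemma rsmem_ok {maps w U} {z : Int × Int} (h : RSmem maps w U z) : okC maps z ∧ z ∉ U := by
  obtain ⟨c, _, hok, hU, hre⟩ := h
  exact ⟨reach_ok_end hre hok, reach_notU_end hre hU⟩

lemma mem_rsF {maps w U} {z : Int × Int} : z ∈ rsF maps w U ↔ RSmem maps w U z := by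
  unfold rsF
  rw [@Finset.mem_filter _ _ (Classical.decPred _)]
  constructor
  · exact fun h => h.2
  · exact fun h => ⟨okC_mem_gridF (rsmem_ok h).1, h⟩

lemma reach_anti {maps} {U U' : Finset (Int × Int)} {a z} (hsub : U ⊆ U')
    (h : Reach maps U' a z) : Reach maps U a z := by
  induction h with
  | refl => exact .refl _
  | step _ hadj hok hU ih => exact .step ih hadj hok (fun hx => hU (hsub hx))

lemma reach_trans {maps U} {a b z : Int × Int} (h1 : Reach maps U a b)
    (h2 : Reach maps U b z) : Reach maps U a z := by
  induction h2 with
  | refl => exact h1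
  | step _ hadj hok hU ih => exact .step ih hadj hok hU

lemma rsF_nil (maps : List String) (U : Finset (Int × Int)) : rsF maps [] U = ∅ := by
  ext z; rw [mem_rsF]; simp [RSmem]

lemma compSum_nil (maps : List String) (U : Finset (Int × Int)) : compSum maps [] U = 0 := by
  rw [compSum, rsF_nil]; simp

-- KEY: one worklist step, valid for any pop discipline and any push order
lemma key_iff (maps : List String) (U : Finset (Int × Int)) (c : Int × Int)
    (w' w₂ : List (Int × Int)) (hok : okC maps c) (hU : c ∉ U)
    (Hin : ∀ n ∈ w₂, n ∈ w' ∨ adjC c n)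
    (Hcov : ∀ n, adjC c n → okC maps n → n ∉ U → n ≠ c → n ∈ w₂)
    (Hw' : ∀ n ∈ w', n ∈ w₂) (z : Int × Int) :
    RSmem maps (c :: w') U z ↔ (z = c ∨ RSmem maps w₂ (insert c U) z) := by
  constructor
  · rintro ⟨c0, hc0, hok0, hU0, hre⟩
    induction hre with
    | refl =>
      rcases List.mem_cons.1 hc0 with rfl | hmem
      · exact Or.inl rfl
      · by_cases hc : c0 = c
        · exact Or.inl hc
        · exact Or.inr ⟨c0, Hw' c0 hmem, hok0, by simp [Finset.mem_insert, hc, hU0], .refl c0⟩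
    | @step b z' hre' hadj hokz hUz ih =>
      by_cases hzc : z' = c
      · exact Or.inl hzc
      · have hzU2 : z' ∉ insert c U := by simp [Finset.mem_insert, hzc, hUz]
        rcases ih with rfl | ⟨s, hs, hoks, hsU2, hres⟩
        · exact Or.inr ⟨z', Hcov z' hadj hokz hUz hzc, hokz, hzU2, .refl z'⟩
        · exact Or.inr ⟨s, hs, hoks, hsU2, .step hres hadj hokz hzU2⟩
  · rintro (rfl | ⟨s, hs, hoks, hsU2, hre⟩)
    · exact ⟨z, List.mem_cons_self, hok, hU, .refl z⟩
    · have hsU : s ∉ U := fun h => hsU2 (Finset.mem_insert_of_mem h)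
      have hre' : Reach maps U s z := reach_anti (Finset.subset_insert c U) hre
      rcases Hin s hs with hw | hadj
      · exact ⟨s, List.mem_cons_of_mem c hw, hoks, hsU, hre'⟩
      · exact ⟨c, List.mem_cons_self, hok, hU,
          reach_trans (Reach.step (.refl c) hadj hoks hsU) hre'⟩

lemma key_rsF (maps : List String) (U : Finset (Int × Int)) (c : Int × Int)
    (w' w₂ : List (Int × Int)) (hok : okC maps c) (hU : c ∉ U)
    (Hin : ∀ n ∈ w₂, n ∈ w' ∨ adjC c n)
    (Hcov : ∀ n, adjC c n → okC maps n → n ∉ U → n ≠ c → n ∈ w₂)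
    (Hw' : ∀ n ∈ w', n ∈ w₂) :
    rsF maps (c :: w') U = insert c (rsF maps w₂ (insert c U)) := by
  ext z
  rw [mem_rsF, key_iff maps U c w' w₂ hok hU Hin Hcov Hw', Finset.mem_insert, mem_rsF]

lemma key_sum (maps : List String) (U : Finset (Int × Int)) (c : Int × Int)
    (w' w₂ : List (Int × Int)) (hok : okC maps c) (hU : c ∉ U)
    (Hin : ∀ n ∈ w₂, n ∈ w' ∨ adjC c n)
    (Hcov : ∀ n, adjC c n → okC maps n → n ∉ U → n ≠ c → n ∈ w₂)
    (Hw' : ∀ n ∈ w', n ∈ w₂) :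
    compSum maps (c :: w') U = valAt maps c.1 c.2 + compSum maps w₂ (insert c U) := by
  unfold compSum
  rw [key_rsF maps U c w' w₂ hok hU Hin Hcov Hw', Finset.sum_insert]
  intro hmem
  exact (rsmem_ok (mem_rsF.1 hmem)).2 (Finset.mem_insert_self c U)

lemma mem_gsetV {maps : List String} {V : List (List Int)} {z : Int × Int} :
    z ∈ gsetV maps V ↔ z ∈ gridF maps ∧ ¬ entry? V z.1 z.2 = some 0 := by
  unfold gsetV; rw [Finset.mem_filter]

lemma entry?_mark (V : List (List Int)) {x y : Int} (a b : Int) (h : entry? V x y = some 0)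
    (hx : 0 ≤ x) (hy : 0 ≤ y) (ha : 0 ≤ a) (hb : 0 ≤ b) :
    entry? (markCell V x y) a b = if a = x ∧ b = y then some 1 else entry? V a b := by
  unfold entry? at h ⊢
  cases hrow : V[x.toNat]? with
  | none => rw [hrow] at h; simp at h
  | some row =>
    rw [hrow] at h
    simp only [Option.bind_some] at h
    obtain ⟨hxlen, -⟩ := List.getElem?_eq_some_iff.1 hrow
    obtain ⟨hylen, -⟩ := List.getElem?_eq_some_iff.1 h
    have hget : V.getD x.toNat [] = row := by
      rw [List.getD_eq_getElem?_getD, hrow]; rfl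
    unfold markCell
    rw [hget]
    by_cases hax : a = x
    · subst hax
      have h1 : (V.set a.toNat (row.set y.toNat 1))[a.toNat]? = some (row.set y.toNat 1) := by
        rw [List.getElem?_set]; simp [hxlen]
      rw [h1, Option.bind_some]
      by_cases hby : b = y
      · subst hby
        have h2 : (row.set b.toNat 1)[b.toNat]? = some 1 := by
          rw [List.getElem?_set]; simp [hylen]
        rw [h2]; simp
      · have hbn : ¬ (y.toNat = b.toNat) := by omega
        have h2 : (row.set y.toNat 1)[b.toNat]? = row[b.toNat]? := by
          rw [List.getElem?_set]; simp [hbn]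
        rw [h2, if_neg (by tauto), hrow, Option.bind_some]
    · have han : ¬ (x.toNat = a.toNat) := by omega
      have h1 : (V.set x.toNat (row.set y.toNat 1))[a.toNat]? = V[a.toNat]? := by
        rw [List.getElem?_set]; simp [han]
      rw [h1, if_neg (by tauto)]

lemma gset_mark (maps : List String) (V : List (List Int)) {x y : Int}
    (hin : (x, y) ∈ gridF maps) (h : entry? V x y = some 0) :
    gsetV maps (markCell V x y) = insert (x, y) (gsetV maps V) := by
  have hb := (mem_gridF maps (x, y)).1 hin
  ext z
  rw [mem_gsetV, Finset.mem_insert, mem_gsetV]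
  by_cases hz : z ∈ gridF maps
  · have hzb := (mem_gridF maps z).1 hz
    rw [entry?_mark V z.1 z.2 h hb.1 hb.2.2.1 hzb.1 hzb.2.2.1]
    by_cases hzxy : z = (x, y)
    · subst hzxy
      simp [hz]
    · have hne : ¬ (z.1 = x ∧ z.2 = y) := by
        rintro ⟨h1, h2⟩; exact hzxy (Prod.ext h1 h2)
      simp [hne, hzxy, hz]
  · have hne : z ≠ (x, y) := fun he => hz (he ▸ hin)
    simp [hz, hne]

lemma notin_gsetV {maps : List String} {V : List (List Int)} {z : Int × Int}
    (hz : z ∈ gridF maps) : z ∉ gsetV maps V ↔ entry? V z.1 z.2 = some 0 := by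
  rw [mem_gsetV]; simp [hz]

lemma adj_dList {x y : Int} {off : Int × Int} (h : off ∈ dList) :
    adjC (x, y) (x + off.1, y + off.2) := by
  simp only [dList, List.mem_cons, List.not_mem_nil, or_false] at h
  rcases h with rfl | rfl | rfl | rfl <;> simp [adjC] <;> omega

lemma adj_off {x y : Int} {n : Int × Int} (h : adjC (x, y) n) :
    ∃ off ∈ dList, n = (x + off.1, y + off.2) := by
  obtain ⟨a, b⟩ := n
  simp only [adjC] at h
  rcases h with ⟨h1, h2 | h2⟩ | ⟨h1, h2 | h2⟩
  · exact ⟨(0, 1), by simp [dList], by simp at h1 h2 ⊢; omega⟩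
  · exact ⟨(0, -1), by simp [dList], by simp at h1 h2 ⊢; omega⟩
  · exact ⟨(1, 0), by simp [dList], by simp at h1 h2 ⊢; omega⟩
  · exact ⟨(-1, 0), by simp [dList], by simp at h1 h2 ⊢; omega⟩

-- full characterisation of A's neighbour-push fold
lemma push_spec (maps : List String) (x y : Int) :
    ∀ (offs : List (Int × Int)) (q : List (Int × Int)) (V : List (List Int)),
      ∃ P : List (Int × Int),
        (offs.foldl (pushStep maps x y) (q, V)).1 = q ++ P ∧
        gsetV maps (offs.foldl (pushStep maps x y) (q, V)).2 = gsetV maps V ∪ P.toFinset ∧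
        P.Nodup ∧
        (∀ n ∈ P, okC maps n ∧ n ∉ gsetV maps V ∧ ∃ off ∈ offs, n = (x + off.1, y + off.2)) ∧
        (∀ off ∈ offs, okC maps (x + off.1, y + off.2) →
          (x + off.1, y + off.2) ∉ gsetV maps V → (x + off.1, y + off.2) ∈ P) := by
  intro offs
  induction offs with
  | nil =>
    intro q V
    exact ⟨[], by simp, by simp, List.nodup_nil, by simp, by simp⟩
  | cons off offs ih =>
    intro q V
    simp only [List.foldl_cons]
    set n : Int × Int := (x + off.1, y + off.2) with hn
    by_cases hstep : okC maps n ∧ entry? V n.1 n.2 = some 0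
    · have hngrid : n ∈ gridF maps := okC_mem_gridF hstep.1
      have hpush : pushStep maps x y (q, V) off = (q ++ [n], markCell V n.1 n.2) := by
        unfold pushStep
        rw [if_pos, if_pos]
        · exact ⟨hstep.1.2.2.2.2, hstep.2⟩
        · obtain ⟨h1, h2, h3, h4, -⟩ := hstep.1
          exact ⟨h1, h2, h3, h4⟩
      rw [hpush]
      obtain ⟨P, hP1, hP2, hPnd, hPmem, hPcov⟩ := ih (q ++ [n]) (markCell V n.1 n.2)
      have hmark : gsetV maps (markCell V n.1 n.2) = insert n (gsetV maps V) := by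
        have := gset_mark maps V (x := n.1) (y := n.2) (by simpa using hngrid) hstep.2
        simpa using this
      have hnG : n ∉ gsetV maps V := (notin_gsetV hngrid).2 hstep.2
      refine ⟨n :: P, ?_, ?_, ?_, ?_, ?_⟩
      · rw [hP1, List.append_assoc]; rfl
      · rw [hP2, hmark]
        ext z
        simp only [Finset.mem_union, Finset.mem_insert, List.toFinset_cons, List.mem_toFinset]
        tauto
      · refine List.Nodup.cons ?_ hPnd
        intro hmem
        have := (hPmem n hmem).2.1
        rw [hmark] at this
        exact this (Finset.mem_insert_self n _)
      · intro m hm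
        rcases List.mem_cons.1 hm with rfl | hm'
        · exact ⟨hstep.1, hnG, ⟨off, List.mem_cons_self, rfl⟩⟩
        · obtain ⟨hok, hnotin, off', hoff', heq⟩ := hPmem m hm'
          rw [hmark] at hnotin
          exact ⟨hok, fun hx => hnotin (Finset.mem_insert_of_mem hx),
            ⟨off', List.mem_cons_of_mem _ hoff', heq⟩⟩
      · intro off' hoff' hok' hnotin'
        rcases List.mem_cons.1 hoff' with rfl | hoff''
        · exact List.mem_cons_self
        · by_cases heq : (x + off'.1, y + off'.2) = n
          · rw [heq]; exact List.mem_cons_self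
          · refine List.mem_cons_of_mem _ (hPcov off' hoff'' hok' ?_)
            rw [hmark]
            intro hx
            rcases Finset.mem_insert.1 hx with h | h
            · exact heq h
            · exact hnotin' h
    · have hskip : pushStep maps x y (q, V) off = (q, V) := by
        unfold pushStep
        by_cases hb : 0 ≤ x + off.1 ∧ x + off.1 < rowsI maps ∧ 0 ≤ y + off.2 ∧ y + off.2 < colsI maps
        · rw [if_pos hb, if_neg]
          intro hg
          exact hstep ⟨⟨hb.1, hb.2.1, hb.2.2.1, hb.2.2.2, hg.1⟩, hg.2⟩
        · rw [if_neg hb]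
      rw [hskip]
      obtain ⟨P, hP1, hP2, hPnd, hPmem, hPcov⟩ := ih q V
      refine ⟨P, hP1, hP2, hPnd, ?_, ?_⟩
      · intro m hm
        obtain ⟨hok, hnotin, off', hoff', heq⟩ := hPmem m hm
        exact ⟨hok, hnotin, ⟨off', List.mem_cons_of_mem _ hoff', heq⟩⟩
      · intro off' hoff' hok' hnotin'
        rcases List.mem_cons.1 hoff' with rfl | hoff''
        · exfalso
          refine hstep ⟨hok', ?_⟩
          exact (notin_gsetV (okC_mem_gridF hok')).1 hnotin'
        · exact hPcov off' hoff'' hok' hnotin'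

-- A's BFS loop computes the component sum and floods exactly the reachable set
set_option maxHeartbeats 1600000 in
lemma bfs_spec (maps : List String) (queue : List (Int × Int)) (V : List (List Int))
    (food : Int) :
    (∀ c ∈ queue, okC maps c ∧ c ∈ gsetV maps V) → queue.Nodup →
    (bfsLoop maps queue V food).1 =
      food + compSum maps queue (gsetV maps V \ queue.toFinset) ∧
    gsetV maps (bfsLoop maps queue V food).2 =
      gsetV maps V ∪ rsF maps queue (gsetV maps V \ queue.toFinset) := by
  fun_induction bfsLoop maps queue V food with
  | case1 V food =>
    intro _ _
    simp [compSum_nil, rsF_nil]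
  | case2 V food x y rest food' st ih =>
    intro hq hnd
    have hst : st = dList.foldl (pushStep maps x y) (rest, V) := rfl
    have hfood' : food' = food + valAt maps x y := rfl
    clear_value st food'
    obtain ⟨P, hP1, hP2, hPnd, hPmem, hPcov⟩ := push_spec maps x y dList rest V
    rw [← hst] at hP1 hP2
    have hc_ok : okC maps (x, y) := (hq _ List.mem_cons_self).1
    have hcG : (x, y) ∈ gsetV maps V := (hq _ List.mem_cons_self).2
    have hrest : ∀ n ∈ rest, okC maps n ∧ n ∈ gsetV maps V :=
      fun n hn => hq n (List.mem_cons_of_mem _ hn)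
    have hcrest : (x, y) ∉ rest := (List.nodup_cons.1 hnd).1
    have hrnd : rest.Nodup := (List.nodup_cons.1 hnd).2
    have hPG : ∀ n ∈ P, n ∉ gsetV maps V := fun n hn => (hPmem n hn).2.1
    set G := gsetV maps V with hG
    set U : Finset (Int × Int) := G \ ((x, y) :: rest).toFinset with hU
    have hUsub : U ⊆ G := Finset.sdiff_subset
    have hcU : (x, y) ∉ U := by
      rw [hU]
      simp [Finset.mem_sdiff]
    -- the avoid set after the step
    have hU2 : gsetV maps st.2 \ st.1.toFinset = insert (x, y) U := by
      ext z
      have h1 : z ∈ st.1.toFinset ↔ (z ∈ rest ∨ z ∈ P) := by rw [hP1]; simp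
      have h2 : z ∈ gsetV maps st.2 ↔ (z ∈ G ∨ z ∈ P) := by rw [hP2]; simp
      have h3 : z ∈ U ↔ (z ∈ G ∧ ¬(z = (x, y) ∨ z ∈ rest)) := by
        rw [hU]; simp [Finset.mem_sdiff]
      rw [Finset.mem_sdiff, Finset.mem_insert, h1, h2, h3]
      constructor
      · rintro ⟨hzGP, hz2⟩
        by_cases hzc : z = (x, y)
        · exact Or.inl hzc
        · rcases hzGP with hzG | hzP
          · exact Or.inr ⟨hzG, by rintro (h | h); exacts [hzc h, hz2 (Or.inl h)]⟩
          · exact absurd (Or.inr hzP) hz2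
      · rintro (rfl | ⟨hzG, hz⟩)
        · exact ⟨Or.inl hcG, by rintro (h | h); exacts [hcrest h, hPG _ h hcG]⟩
        · exact ⟨Or.inl hzG, by rintro (h | h); exacts [hz (Or.inr h), hPG _ h hzG]⟩
    -- hypotheses of the induction
    have hq2 : ∀ c ∈ st.1, okC maps c ∧ c ∈ gsetV maps st.2 := by
      intro c hc
      rw [hP1] at hc
      rcases List.mem_append.1 hc with hc | hc
      · exact ⟨(hrest c hc).1, by rw [hP2]; exact Finset.mem_union_left _ (hrest c hc).2⟩
      · exact ⟨(hPmem c hc).1, by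
          rw [hP2]; exact Finset.mem_union_right _ (List.mem_toFinset.2 hc)⟩
    have hnd2 : st.1.Nodup := by
      rw [hP1]
      refine List.Nodup.append hrnd hPnd ?_
      intro a ha haP
      exact hPG a haP (hrest a ha).2
    obtain ⟨ih1, ih2⟩ := ih hq2 hnd2
    -- key-lemma hypotheses for this step
    have Hin : ∀ n ∈ rest ++ P, n ∈ rest ∨ adjC (x, y) n := by
      intro n hn
      rcases List.mem_append.1 hn with hn | hn
      · exact Or.inl hn
      · obtain ⟨-, -, off, hoff, rfl⟩ := hPmem n hn
        exact Or.inr (adj_dList hoff)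
    have Hcov : ∀ n, adjC (x, y) n → okC maps n → n ∉ U → n ≠ (x, y) → n ∈ rest ++ P := by
      intro n hadj hok hnU hnc
      by_cases hnG : n ∈ G
      · have : n ∈ ((x, y) :: rest).toFinset := by
          by_contra hcon
          exact hnU (Finset.mem_sdiff.2 ⟨hnG, hcon⟩)
        rcases List.mem_cons.1 (List.mem_toFinset.1 this) with rfl | hmem
        · exact absurd rfl hnc
        · exact List.mem_append.2 (Or.inl hmem)
      · obtain ⟨off, hoff, rfl⟩ := adj_off hadj
        exact List.mem_append.2 (Or.inr (hPcov off hoff hok hnG))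
    have Hw' : ∀ n ∈ rest, n ∈ rest ++ P := fun n hn => List.mem_append.2 (Or.inl hn)
    have hkey_sum := key_sum maps U (x, y) rest (rest ++ P) hc_ok hcU Hin Hcov Hw'
    have hkey_rsF := key_rsF maps U (x, y) rest (rest ++ P) hc_ok hcU Hin Hcov Hw'
    constructor
    · rw [ih1, hfood', hU2, hP1, hkey_sum]
      have hval : valAt maps ((x, y) : Int × Int).1 ((x, y) : Int × Int).2 = valAt maps x y := rfl
      rw [hval]; ring
    · rw [ih2, hU2, hP1, hkey_rsF, hP2]
      have hPsub : P.toFinset ⊆ rsF maps (rest ++ P) (insert (x, y) U) := by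
        intro n hn
        rw [List.mem_toFinset] at hn
        rw [mem_rsF]
        have hnG := hPG n hn
        refine ⟨n, List.mem_append.2 (Or.inr hn), (hPmem n hn).1, ?_, .refl n⟩
        intro hmem
        rcases Finset.mem_insert.1 hmem with rfl | hmem
        · exact hnG hcG
        · exact hnG (hUsub hmem)
      ext z
      simp only [Finset.mem_union, Finset.mem_insert]
      constructor
      · rintro ((hz | hz) | hz)
        · exact Or.inl hz
        · exact Or.inr (Or.inr (hPsub hz))
        · exact Or.inr (Or.inr hz)
      · rintro (hz | (rfl | hz))
        · exact Or.inl (Or.inl hz)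
        · exact Or.inl (Or.inl hcG)
        · exact Or.inr hz

lemma gsetV_init (maps : List String) :
    gsetV maps (List.replicate maps.length (List.replicate (maps.headD "").toList.length 0)) =
      (∅ : Finset (Int × Int)) := by
  ext z
  simp only [Finset.notMem_empty, iff_false]
  rw [mem_gsetV]
  rintro ⟨hz, hne⟩
  obtain ⟨h1, h2, h3, h4⟩ := (mem_gridF maps z).1 hz
  apply hne
  unfold entry?
  have hx : z.1.toNat < maps.length := by
    simp only [rowsI] at h2
    omega
  have hy : z.2.toNat < (maps.headD "").toList.length := by
    simp only [colsI] at h4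
    omega
  rw [List.getElem?_replicate, if_pos hx, Option.bind_some, List.getElem?_replicate, if_pos hy]

-- when the avoid set is a union of components, flooding from c covers exactly comp c
lemma rsF_eq_comp (maps : List String) (U : Finset (Int × Int)) (c : Int × Int)
    (hcl : ∀ z ∈ U, ∀ w, Conn maps z w → w ∈ U) (hok : okC maps c) (hU : c ∉ U) :
    rsF maps [c] U = compF maps c := by
  ext z
  rw [mem_rsF, mem_compF hok]
  constructor
  · rintro ⟨c0, hc0, hok0, hU0, hre⟩
    obtain rfl := List.mem_singleton.1 hc0
    induction hre with
    | refl => exact Relation.ReflTransGen.refl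
    | step hre' hadj hokz hUz ih =>
      exact Relation.ReflTransGen.tail ih ⟨reach_ok_end hre' hok0, hokz, hadj⟩
  · intro h
    refine ⟨c, List.mem_singleton.2 rfl, hok, hU, ?_⟩
    induction h with
    | refl => exact Reach.refl c
    | @tail b z' hcb hstep ih =>
      have hcz : Conn maps c z' := Relation.ReflTransGen.tail hcb hstep
      have hzU : z' ∉ U := fun hz => hU (hcl z' hz c (conn_symm hcz))
      exact Reach.step ih hstep.2.2 hstep.2.1 hzU

-- ---- the flat scan, shared by both programs ----
lemma flatten_fold {σ : Type} (is js : List Int) (f : σ → Int → Int → σ) (init : σ) :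
    is.foldl (fun s i => js.foldl (fun s j => f s i j) s) init =
      (is.flatMap (fun i => js.map (fun j => (i, j)))).foldl (fun s c => f s c.1 c.2) init := by
  induction is generalizing init with
  | nil => simp
  | cons i is ih =>
    simp only [List.flatMap_cons, List.foldl_cons, List.foldl_append, List.foldl_map]
    exact ih _

lemma mem_cells {maps : List String} {z : Int × Int} :
    z ∈ cells maps ↔ z ∈ gridF maps := by
  rw [mem_gridF]
  simp only [cells, List.mem_flatMap, List.mem_map, PySem.List.mem_pyRange_one]
  constructor
  · rintro ⟨i, ⟨h0, hi⟩, j, ⟨h0', hj⟩, rfl⟩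
    exact ⟨h0, hi, h0', hj⟩
  · rintro ⟨h0, hi, h0', hj⟩
    exact ⟨z.1, ⟨h0, hi⟩, z.2, ⟨h0', hj⟩, rfl⟩

lemma cells_nodup (maps : List String) : (cells maps).Nodup := by
  unfold cells
  have hjs := PySem.List.nodup_pyRange_one 0 (colsI maps)
  have his := PySem.List.nodup_pyRange_one 0 (rowsI maps)
  generalize PySem.List.pyRange 0 (colsI maps) 1 = js at hjs
  generalize PySem.List.pyRange 0 (rowsI maps) 1 = is at his
  induction is with
  | nil => simp
  | cons i is ih =>
    simp only [List.flatMap_cons]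
    refine List.Nodup.append ?_ (ih (List.nodup_cons.1 his).2) ?_
    · exact hjs.map (fun a b h => by simpa using congrArg Prod.snd h)
    · intro a ha hb
      obtain ⟨j, -, rfl⟩ := List.mem_map.1 ha
      obtain ⟨i', hi', hmem⟩ := List.mem_flatMap.1 hb
      obtain ⟨j', -, heq⟩ := List.mem_map.1 hmem
      have h1 : i' = i := congrArg Prod.fst heq
      subst h1
      exact (List.nodup_cons.1 his).1 hi'

-- ---- unfolding equations for leadAux ----
lemma leadAux_cons_notok {maps : List String} {seen : List (Int × Int)} {c : Int × Int}
    {t : List (Int × Int)} (h : ¬ okC maps c) :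
    leadAux maps seen (c :: t) = leadAux maps seen t := by
  simp only [leadAux]
  rw [if_neg h]

lemma leadAux_cons_old {maps : List String} {seen : List (Int × Int)} {c : Int × Int}
    {t : List (Int × Int)} (hok : okC maps c) (hex : ∃ d ∈ seen, Conn maps d c) :
    leadAux maps seen (c :: t) = leadAux maps (c :: seen) t := by
  simp only [leadAux]
  rw [if_pos hok, if_pos hex]

lemma leadAux_cons_new {maps : List String} {seen : List (Int × Int)} {c : Int × Int}
    {t : List (Int × Int)} (hok : okC maps c) (hex : ¬ ∃ d ∈ seen, Conn maps d c) :
    leadAux maps seen (c :: t) = c :: leadAux maps (c :: seen) t := by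
  simp only [leadAux]
  rw [if_pos hok, if_neg hex]

lemma leadAux_ok {maps : List String} :
    ∀ (cs seen : List (Int × Int)) (ℓ : Int × Int), ℓ ∈ leadAux maps seen cs → okC maps ℓ := by
  intro cs
  induction cs with
  | nil => intro seen ℓ h; simp [leadAux] at h
  | cons c t ih =>
    intro seen ℓ h
    by_cases hok : okC maps c
    · by_cases hex : ∃ d ∈ seen, Conn maps d c
      · rw [leadAux_cons_old hok hex] at h
        exact ih _ _ h
      · rw [leadAux_cons_new hok hex] at h
        rcases List.mem_cons.1 h with rfl | h'
        · exact hok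
        · exact ih _ _ h'
    · rw [leadAux_cons_notok hok] at h
      exact ih _ _ h

-- ---- A's scan produces the leader sums ----
lemma A_scan (maps : List String) :
    ∀ (cs : List (Int × Int)), (∀ c ∈ cs, c ∈ gridF maps) →
    ∀ (ans : List Int) (V : List (List Int)) (seen : List (Int × Int)),
      (∀ z, z ∈ gsetV maps V ↔ ∃ d ∈ seen, Conn maps d z) →
      (∀ d ∈ seen, okC maps d) →
      (cs.foldl (fun st c => stepA maps c.1 st c.2) (ans, V)).1 =
        ans ++ (leadAux maps seen cs).map (csum maps) := by
  intro cs
  induction cs with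
  | nil => intro _ ans V seen _ _; simp [leadAux]
  | cons c t ih =>
    obtain ⟨x, y⟩ := c
    intro hcs ans V seen hcov hsok
    have hcg : ((x, y) : Int × Int) ∈ gridF maps := hcs _ List.mem_cons_self
    have htail := fun d hd => hcs d (List.mem_cons_of_mem _ hd)
    simp only [List.foldl_cons]
    by_cases hok : okC maps (x, y)
    · by_cases hex : ∃ d ∈ seen, Conn maps d (x, y)
      · -- already flooded: A skips, (x,y) is not a leader
        have hcU : ((x, y) : Int × Int) ∈ gsetV maps V := (hcov _).2 hex
        have hstep : stepA maps x (ans, V) y = (ans, V) := by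
          unfold stepA
          rw [if_neg]
          rintro ⟨-, h2⟩
          exact (mem_gsetV.1 hcU).2 h2
        rw [hstep, leadAux_cons_old hok hex]
        refine ih htail ans V ((x, y) :: seen) ?_ ?_
        · intro z
          rw [hcov z]
          constructor
          · rintro ⟨d, hd, hconn⟩
            exact ⟨d, List.mem_cons_of_mem _ hd, hconn⟩
          · rintro ⟨d, hd, hconn⟩
            rcases List.mem_cons.1 hd with rfl | hd'
            · obtain ⟨d0, hd0, hc0⟩ := hex
              exact ⟨d0, hd0, conn_trans hc0 hconn⟩
            · exact ⟨d, hd', hconn⟩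
        · intro d hd
          rcases List.mem_cons.1 hd with rfl | hd'
          exacts [hok, hsok d hd']
      · -- a new leader: the BFS floods exactly its component
        have hcU : ((x, y) : Int × Int) ∉ gsetV maps V := fun h => hex ((hcov _).1 h)
        have hent : entry? V x y = some 0 := (notin_gsetV hcg).1 hcU
        have hchar : cellChar maps x y ≠ 'X' := hok.2.2.2.2
        have hstep : stepA maps x (ans, V) y =
            (ans ++ [(bfsLoop maps [(x, y)] (markCell V x y) 0).1],
              (bfsLoop maps [(x, y)] (markCell V x y) 0).2) := by
          unfold stepA
          rw [if_pos ⟨hchar, hent⟩]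
        have hmark : gsetV maps (markCell V x y) = insert (x, y) (gsetV maps V) :=
          gset_mark maps V hcg hent
        have hq : ∀ c0 ∈ [((x, y) : Int × Int)], okC maps c0 ∧ c0 ∈ gsetV maps (markCell V x y) := by
          intro c0 hc0
          obtain rfl := List.mem_singleton.1 hc0
          exact ⟨hok, by rw [hmark]; exact Finset.mem_insert_self _ _⟩
        obtain ⟨hA1, hA2⟩ := bfs_spec maps [(x, y)] (markCell V x y) 0 hq (List.nodup_singleton _)
        have hUeq : gsetV maps (markCell V x y) \ ([((x, y) : Int × Int)]).toFinset =
            gsetV maps V := by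
          rw [hmark]
          ext z
          simp only [Finset.mem_sdiff, Finset.mem_insert, List.mem_toFinset, List.mem_singleton]
          constructor
          · rintro ⟨rfl | hz, hne⟩
            · exact absurd rfl hne
            · exact hz
          · intro hz
            exact ⟨Or.inr hz, fun he => hcU (he ▸ hz)⟩
        rw [hUeq] at hA1 hA2
        have hcl : ∀ z ∈ gsetV maps V, ∀ w, Conn maps z w → w ∈ gsetV maps V := by
          intro z hz w hzw
          obtain ⟨d, hd, hdz⟩ := (hcov z).1 hz
          exact (hcov w).2 ⟨d, hd, conn_trans hdz hzw⟩
        have hcomp := rsF_eq_comp maps (gsetV maps V) (x, y) hcl hok hcU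
        have hsum : (bfsLoop maps [(x, y)] (markCell V x y) 0).1 = csum maps (x, y) := by
          rw [hA1, compSum, hcomp]
          simp [csum]
        have hcmem : ((x, y) : Int × Int) ∈ compF maps (x, y) :=
          (mem_compF hok).2 Relation.ReflTransGen.refl
        have hset : gsetV maps (bfsLoop maps [(x, y)] (markCell V x y) 0).2 =
            gsetV maps V ∪ compF maps (x, y) := by
          rw [hA2, hcomp, hmark]
          ext z
          simp only [Finset.mem_union, Finset.mem_insert]
          constructor
          · rintro ((rfl | h) | h)
            · exact Or.inr hcmem
            · exact Or.inl h
            · exact Or.inr h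
          · rintro (h | h)
            · exact Or.inl (Or.inr h)
            · exact Or.inr h
        rw [hstep, leadAux_cons_new hok hex, List.map_cons, hsum]
        have ihres := ih htail (ans ++ [csum maps (x, y)])
          (bfsLoop maps [(x, y)] (markCell V x y) 0).2 ((x, y) :: seen) ?_ ?_
        · rw [ihres, List.append_assoc]
          rfl
        · intro z
          rw [hset]
          simp only [Finset.mem_union]
          rw [hcov z, mem_compF hok]
          constructor
          · rintro (⟨d, hd, hconn⟩ | hconn)
            · exact ⟨d, List.mem_cons_of_mem _ hd, hconn⟩
            · exact ⟨(x, y), List.mem_cons_self, hconn⟩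
          · rintro ⟨d, hd, hconn⟩
            rcases List.mem_cons.1 hd with rfl | hd'
            · exact Or.inr hconn
            · exact Or.inl ⟨d, hd', hconn⟩
        · intro d hd
          rcases List.mem_cons.1 hd with rfl | hd'
          exacts [hok, hsok d hd']
    · -- a sea cell: both sides skip
      have hchar : ¬ cellChar maps x y ≠ 'X' := by
        obtain ⟨g1, g2, g3, g4⟩ := (mem_gridF maps (x, y)).1 hcg
        intro h'
        exact hok ⟨g1, g2, g3, g4, h'⟩
      have hstep : stepA maps x (ans, V) y = (ans, V) := by
        unfold stepA
        rw [if_neg]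
        rintro ⟨h1, -⟩
        exact hchar h1
      rw [hstep, leadAux_cons_notok hok]
      exact ih htail ans V seen hcov hsok

-- ---- B: union-find correctness ----
lemma connIdx_symm {maps : List String} {v w : Int} (h : connIdx maps v w) : connIdx maps w v := by
  rcases h with rfl | ⟨c, d, hc, hd, hcd, h1, h2⟩
  · exact Or.inl rfl
  · exact Or.inr ⟨d, c, hd, hc, conn_symm hcd, h2, h1⟩

lemma idx_inj {maps : List String} {c d : Int × Int} (hc : c ∈ gridF maps)
    (hd : d ∈ gridF maps) (h : idxI maps c = idxI maps d) : c = d := by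
  obtain ⟨hc1, hc2, hc3, hc4⟩ := (mem_gridF maps c).1 hc
  obtain ⟨hd1, hd2, hd3, hd4⟩ := (mem_gridF maps d).1 hd
  unfold idxI at h
  have h1 : c.1 = d.1 := by
    rcases lt_trichotomy c.1 d.1 with hlt | heq | hgt
    · nlinarith
    · exact heq
    · nlinarith
  have h2 : c.2 = d.2 := by rw [h1] at h; linarith
  exact Prod.ext h1 h2

lemma connIdx_trans {maps : List String} {u v w : Int} (h1 : connIdx maps u v)
    (h2 : connIdx maps v w) : connIdx maps u w := by
  rcases h1 with rfl | ⟨c, d, hc, hd, hcd, hic, hid⟩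
  · exact h2
  · rcases h2 with rfl | ⟨c', d', hc', hd', hcd', hic', hid'⟩
    · exact Or.inr ⟨c, d, hc, hd, hcd, hic, hid⟩
    · have : d = c' := idx_inj (okC_mem_gridF hd) (okC_mem_gridF hc') (by rw [hid, hic'])
      subst this
      exact Or.inr ⟨c, d', hc, hd', conn_trans hcd hcd', hic, hid'⟩

lemma connIdx_conn {maps : List String} {e f : Int × Int} (he : okC maps e) (hf : okC maps f)
    (h : connIdx maps (idxI maps e) (idxI maps f)) : Conn maps e f := by
  rcases h with heq | ⟨c, d, hc, hd, hcd, hic, hid⟩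
  · rw [idx_inj (okC_mem_gridF he) (okC_mem_gridF hf) heq]
    exact Relation.ReflTransGen.refl
  · have h1 : c = e := idx_inj (okC_mem_gridF hc) (okC_mem_gridF he) hic
    have h2 : d = f := idx_inj (okC_mem_gridF hd) (okC_mem_gridF hf) hid
    subst h1; subst h2; exact hcd

lemma idx_bounds {maps : List String} {c : Int × Int} (hc : c ∈ gridF maps) :
    0 ≤ idxI maps c ∧ idxI maps c < nTot maps := by
  obtain ⟨h1, h2, h3, h4⟩ := (mem_gridF maps c).1 hc
  unfold idxI nTot
  constructor
  · nlinarith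
  · nlinarith

-- list assignment parent[i] = v on a valid state
lemma pySetD_eq {p : List Int} {i : Int} (h0 : 0 ≤ i) (h : i.toNat < p.length) (v : Int) :
    PySem.List.pySetD p i v = p.set i.toNat v := by
  unfold PySem.List.pySetD
  rw [show PySem.List.pySet? p i v = PySem.List.pySet? p ((i.toNat : Nat) : Int) v by
      rw [Int.toNat_of_nonneg h0],
    PySem.List.pySet?_natCast _ _ _ h]
  rfl

-- parent lookup on a valid state
lemma pyGet_entry {p : List Int} {a v : Int} (h0 : 0 ≤ a) (h : p[a.toNat]? = some v) :
    (PySem.List.pyGet? p a).getD a = v := by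
  have hc : ((a.toNat : Nat) : Int) = a := by omega
  rw [show PySem.List.pyGet? p a = PySem.List.pyGet? p ((a.toNat : Nat) : Int) by rw [hc],
    PySem.List.pyGet?_natCast, h]
  rfl

-- reading the parent entry of a valid state
lemma inv_entry {maps : List String} {p : List Int} (hInv : InvP maps p) {a : Int}
    (h0 : 0 ≤ a) (hn : a < nTot maps) :
    ∃ v : Int, (PySem.List.pyGet? p a).getD a = v ∧ p[a.toNat]? = some v ∧
      0 ≤ v ∧ v ≤ a ∧ connIdx maps v a := by
  obtain ⟨v, hv, h1, h2, h3⟩ := hInv.2 a.toNat (by omega)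
  have hc : ((a.toNat : Nat) : Int) = a := by omega
  exact ⟨v, pyGet_entry h0 hv, hv, h1, by omega, by rwa [hc] at h3⟩

-- find reaches a root connected (as land cells) to its argument
lemma find_spec {maps : List String} {p : List Int} (hInv : InvP maps p) :
    ∀ (fuel : Nat) (a : Int), 0 ≤ a → a < nTot maps → a.toNat < fuel →
      0 ≤ findFuel p fuel a ∧ findFuel p fuel a < nTot maps ∧ findFuel p fuel a ≤ a ∧
      p[(findFuel p fuel a).toNat]? = some (findFuel p fuel a) ∧
      connIdx maps (findFuel p fuel a) a := by
  intro fuel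
  induction fuel with
  | zero => intro a h0 hn h1; omega
  | succ k ih =>
    intro a h0 hn h1
    obtain ⟨v, hget, hv, hv0, hvle, hconn⟩ := inv_entry hInv h0 hn
    simp only [findFuel]
    rw [hget]
    by_cases hva : v = a
    · rw [if_pos hva]
      subst hva
      exact ⟨hv0, by omega, le_refl _, hv, Or.inl rfl⟩
    · rw [if_neg hva]
      obtain ⟨i1, i2, i3, i4, i5⟩ := ih v hv0 (by omega) (by omega)
      exact ⟨i1, i2, by omega, i4, connIdx_trans i5 hconn⟩

-- redirecting a root changes find by a single substitution
lemma find_set {maps : List String} {p : List Int} (hInv : InvP maps p)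
    {rs rb : Int} (hs0 : 0 ≤ rs) (hsb : rs < rb) (hbn : rb < nTot maps)
    (hroots : p[rs.toNat]? = some rs) (hrootb : p[rb.toNat]? = some rb) :
    ∀ (fuel : Nat) (a : Int), 0 ≤ a → a < nTot maps → a.toNat < fuel →
      findFuel (p.set rb.toNat rs) fuel a =
        if findFuel p fuel a = rb then rs else findFuel p fuel a := by
  have hlen : p.length = (nTot maps).toNat := hInv.1
  have hblen : rb.toNat < p.length := by omega
  have hslen : rs.toNat < p.length := by omega
  -- entries of the updated list
  have hget_b : (PySem.List.pyGet? (p.set rb.toNat rs) rb).getD rb = rs := by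
    apply pyGet_entry (by omega)
    rw [List.getElem?_set]
    simp [hblen]
  have hget_s : (PySem.List.pyGet? (p.set rb.toNat rs) rs).getD rs = rs := by
    apply pyGet_entry hs0
    rw [List.getElem?_set_ne (by omega)]
    exact hroots
  have hget_pb : (PySem.List.pyGet? p rb).getD rb = rb := pyGet_entry (by omega) hrootb
  intro fuel
  induction fuel with
  | zero => intro a h0 hn h1; omega
  | succ k ih =>
    intro a h0 hn h1
    by_cases hab : a = rb
    · subst hab
      simp only [findFuel]
      rw [hget_b, if_neg (by omega), hget_pb, if_pos rfl, if_pos rfl]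
      cases k with
      | zero => omega
      | succ m =>
        simp only [findFuel]
        rw [hget_s, if_pos rfl]
    · obtain ⟨v, hget, hv, hv0, hvle, hconn⟩ := inv_entry hInv h0 hn
      have hget' : (PySem.List.pyGet? (p.set rb.toNat rs) a).getD a = v := by
        apply pyGet_entry h0
        rw [List.getElem?_set_ne (by omega)]
        exact hv
      simp only [findFuel]
      rw [hget, hget']
      by_cases hva : v = a
      · rw [if_pos hva, if_pos hva, if_neg hab]
      · rw [if_neg hva, if_neg hva]
        exact ih v hv0 (by omega) (by omega)

lemma set_inv {maps : List String} {p : List Int} (hInv : InvP maps p)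
    {rs rb : Int} (hs0 : 0 ≤ rs) (hsb : rs < rb) (hbn : rb < nTot maps)
    (hconn : connIdx maps rs rb) : InvP maps (p.set rb.toNat rs) := by
  have hlen : p.length = (nTot maps).toNat := hInv.1
  refine ⟨by simp [List.length_set, hlen], ?_⟩
  intro k hk
  by_cases hkb : k = rb.toNat
  · subst hkb
    refine ⟨rs, ?_, hs0, by omega, ?_⟩
    · rw [List.getElem?_set]
      simp [show rb.toNat < p.length by omega]
    · have hcast : ((rb.toNat : Nat) : Int) = rb := by omega
      rw [hcast]
      exact hconn
  · obtain ⟨v, hv, h2, h3, h4⟩ := hInv.2 k hk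
    refine ⟨v, ?_, h2, h3, h4⟩
    rw [List.getElem?_set_ne (by omega)]
    exact hv

-- the union operation: preserves the invariant and find-equalities, and joins a and b
lemma union_spec {maps : List String} {p : List Int} (hInv : InvP maps p)
    {a b : Int} (ha : 0 ≤ a ∧ a < nTot maps) (hb : 0 ≤ b ∧ b < nTot maps)
    (hconn : connIdx maps a b) :
    InvP maps (unionP p a b) ∧
    (∀ x y, 0 ≤ x → x < nTot maps → 0 ≤ y → y < nTot maps →
      findP p x = findP p y → findP (unionP p a b) x = findP (unionP p a b) y) ∧
    findP (unionP p a b) a = findP (unionP p a b) b := by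
  have hlen : p.length = (nTot maps).toNat := hInv.1
  obtain ⟨ha1, ha2, ha3, ha4, ha5⟩ := find_spec hInv p.length a ha.1 ha.2 (by omega)
  obtain ⟨hb1, hb2, hb3, hb4, hb5⟩ := find_spec hInv p.length b hb.1 hb.2 (by omega)
  have hra : findP p a = findFuel p p.length a := rfl
  have hrb : findP p b = findFuel p p.length b := rfl
  have hconn_ab : connIdx maps (findFuel p p.length a) (findFuel p p.length b) :=
    connIdx_trans ha5 (connIdx_trans hconn (connIdx_symm hb5))
  by_cases heq : findP p a = findP p b
  · have hU : unionP p a b = p := by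
      unfold unionP
      simp only [if_pos heq]
    rw [hU]
    exact ⟨hInv, fun x y _ _ _ _ h => h, heq⟩
  · by_cases hlt : findP p a < findP p b
    · -- parent[rb] := ra with rb := find b
      have hset : PySem.List.pySetD p (findP p b) (findP p a) =
          p.set (findP p b).toNat (findP p a) :=
        pySetD_eq (by rw [hrb]; exact hb1) (by rw [hrb]; omega) _
      have hU : unionP p a b = p.set (findP p b).toNat (findP p a) := by
        unfold unionP
        simp only [if_neg heq, if_pos hlt]
        exact hset
      rw [hrb, hra] at hU hlt
      have hinv' := set_inv hInv ha1 hlt hb2 hconn_ab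
      have hform := find_set hInv ha1 hlt hb2 ha4 hb4
      have hlen' : (p.set (findFuel p p.length b).toNat (findFuel p p.length a)).length =
          p.length := by simp
      have hF : ∀ x, 0 ≤ x → x < nTot maps →
          findP (unionP p a b) x =
            if findFuel p p.length x = findFuel p p.length b then findFuel p p.length a
            else findFuel p p.length x := by
        intro x hx0 hxn
        rw [hU]
        show findFuel _ (p.set (findFuel p p.length b).toNat (findFuel p p.length a)).length x = _
        rw [hlen']
        exact hform p.length x hx0 hxn (by omega)
      refine ⟨by rw [hU]; exact hinv', ?_, ?_⟩
      · intro x y hx0 hxn hy0 hyn h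
        rw [hF x hx0 hxn, hF y hy0 hyn]
        have h' : findFuel p p.length x = findFuel p p.length y := h
        rw [h']
      · rw [hF a ha.1 ha.2, hF b hb.1 hb.2]
        have hne : findFuel p p.length a ≠ findFuel p p.length b := by
          rw [hra, hrb] at heq; exact heq
        rw [if_neg hne, if_pos rfl]
    · -- parent[ra] := rb with ra := find a
      have hgt : findP p b < findP p a := by
        rcases lt_trichotomy (findP p a) (findP p b) with h | h | h
        · exact absurd h hlt
        · exact absurd h heq
        · exact h
      have hset : PySem.List.pySetD p (findP p a) (findP p b) =
          p.set (findP p a).toNat (findP p b) :=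
        pySetD_eq (by rw [hra]; exact ha1) (by rw [hra]; omega) _
      have hU : unionP p a b = p.set (findP p a).toNat (findP p b) := by
        unfold unionP
        simp only [if_neg heq, if_neg hlt]
        exact hset
      rw [hrb, hra] at hU hgt
      have hinv' := set_inv hInv hb1 hgt ha2 (connIdx_symm hconn_ab)
      have hform := find_set hInv hb1 hgt ha2 hb4 ha4
      have hlen' : (p.set (findFuel p p.length a).toNat (findFuel p p.length b)).length =
          p.length := by simp
      have hF : ∀ x, 0 ≤ x → x < nTot maps →
          findP (unionP p a b) x =
            if findFuel p p.length x = findFuel p p.length a then findFuel p p.length b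
            else findFuel p p.length x := by
        intro x hx0 hxn
        rw [hU]
        show findFuel _ (p.set (findFuel p p.length a).toNat (findFuel p p.length b)).length x = _
        rw [hlen']
        exact hform p.length x hx0 hxn (by omega)
      refine ⟨by rw [hU]; exact hinv', ?_, ?_⟩
      · intro x y hx0 hxn hy0 hyn h
        rw [hF x hx0 hxn, hF y hy0 hyn]
        have h' : findFuel p p.length x = findFuel p p.length y := h
        rw [h']
      · rw [hF a ha.1 ha.2, hF b hb.1 hb.2]
        have hne : findFuel p p.length b ≠ findFuel p p.length a := by
          rw [hra, hrb] at heq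
          exact fun h => heq h.symm
        rw [if_neg hne, if_pos rfl]

lemma uCell_spec (maps : List String) {p : List Int} (hInv : InvP maps p) {c : Int × Int}
    (hc : c ∈ gridF maps) :
    InvP maps (uCell maps p c.1 c.2) ∧
    (∀ x y, 0 ≤ x → x < nTot maps → 0 ≤ y → y < nTot maps →
      findP p x = findP p y →
      findP (uCell maps p c.1 c.2) x = findP (uCell maps p c.1 c.2) y) ∧
    (cellChar maps c.1 c.2 ≠ 'X' → c.1 + 1 < rowsI maps → cellChar maps (c.1 + 1) c.2 ≠ 'X' →
      findP (uCell maps p c.1 c.2) (idxI maps c) =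
        findP (uCell maps p c.1 c.2) (idxI maps (c.1 + 1, c.2))) ∧
    (cellChar maps c.1 c.2 ≠ 'X' → c.2 + 1 < colsI maps → cellChar maps c.1 (c.2 + 1) ≠ 'X' →
      findP (uCell maps p c.1 c.2) (idxI maps c) =
        findP (uCell maps p c.1 c.2) (idxI maps (c.1, c.2 + 1))) := by
  obtain ⟨hg1, hg2, hg3, hg4⟩ := (mem_gridF maps c).1 hc
  by_cases hX : cellChar maps c.1 c.2 ≠ 'X'
  · have hokc : okC maps c := ⟨hg1, hg2, hg3, hg4, hX⟩
    have hidc := idx_bounds hc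
    -- first: the optional union with the cell below
    have step1 : ∀ q : List Int, InvP maps q →
        InvP maps (if c.1 + 1 < rowsI maps ∧ cellChar maps (c.1 + 1) c.2 ≠ 'X' then
            unionP q (c.1 * colsI maps + c.2) ((c.1 + 1) * colsI maps + c.2) else q) ∧
        (∀ x y, 0 ≤ x → x < nTot maps → 0 ≤ y → y < nTot maps →
          findP q x = findP q y →
          findP (if c.1 + 1 < rowsI maps ∧ cellChar maps (c.1 + 1) c.2 ≠ 'X' then
              unionP q (c.1 * colsI maps + c.2) ((c.1 + 1) * colsI maps + c.2) else q) x =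
            findP (if c.1 + 1 < rowsI maps ∧ cellChar maps (c.1 + 1) c.2 ≠ 'X' then
              unionP q (c.1 * colsI maps + c.2) ((c.1 + 1) * colsI maps + c.2) else q) y) ∧
        (c.1 + 1 < rowsI maps → cellChar maps (c.1 + 1) c.2 ≠ 'X' →
          findP (if c.1 + 1 < rowsI maps ∧ cellChar maps (c.1 + 1) c.2 ≠ 'X' then
              unionP q (c.1 * colsI maps + c.2) ((c.1 + 1) * colsI maps + c.2) else q)
            (idxI maps c) =
          findP (if c.1 + 1 < rowsI maps ∧ cellChar maps (c.1 + 1) c.2 ≠ 'X' then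
              unionP q (c.1 * colsI maps + c.2) ((c.1 + 1) * colsI maps + c.2) else q)
            (idxI maps (c.1 + 1, c.2))) := by
      intro q hq
      by_cases hdc : c.1 + 1 < rowsI maps ∧ cellChar maps (c.1 + 1) c.2 ≠ 'X'
      · have hgd : ((c.1 + 1, c.2) : Int × Int) ∈ gridF maps := by
          rw [mem_gridF]; exact ⟨by omega, hdc.1, hg3, hg4⟩
        have hokd : okC maps (c.1 + 1, c.2) := ⟨by omega, hdc.1, hg3, hg4, hdc.2⟩
        have hcd : connIdx maps (idxI maps c) (idxI maps (c.1 + 1, c.2)) :=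
          Or.inr ⟨c, (c.1 + 1, c.2), hokc, hokd,
            Relation.ReflTransGen.single ⟨hokc, hokd, Or.inr ⟨rfl, Or.inl rfl⟩⟩, rfl, rfl⟩
        have he1 : c.1 * colsI maps + c.2 = idxI maps c := rfl
        have he2 : (c.1 + 1) * colsI maps + c.2 = idxI maps (c.1 + 1, c.2) := rfl
        rw [if_pos hdc, he1, he2]
        obtain ⟨u1, u2, u3⟩ := union_spec hq (idx_bounds hc) (idx_bounds hgd) hcd
        exact ⟨u1, u2, fun _ _ => u3⟩
      · rw [if_neg hdc]
        exact ⟨hq, fun _ _ _ _ _ _ h => h, fun h1 h2 => absurd ⟨h1, h2⟩ hdc⟩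
    obtain ⟨I1, P1, E1⟩ := step1 p hInv
    -- name the intermediate parent list
    set p1 := (if c.1 + 1 < rowsI maps ∧ cellChar maps (c.1 + 1) c.2 ≠ 'X' then
        unionP p (c.1 * colsI maps + c.2) ((c.1 + 1) * colsI maps + c.2) else p) with hp1
    -- second: the optional union with the cell to the right
    have step2 :
        InvP maps (if c.2 + 1 < colsI maps ∧ cellChar maps c.1 (c.2 + 1) ≠ 'X' then
            unionP p1 (c.1 * colsI maps + c.2) (c.1 * colsI maps + c.2 + 1) else p1) ∧
        (∀ x y, 0 ≤ x → x < nTot maps → 0 ≤ y → y < nTot maps →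
          findP p1 x = findP p1 y →
          findP (if c.2 + 1 < colsI maps ∧ cellChar maps c.1 (c.2 + 1) ≠ 'X' then
              unionP p1 (c.1 * colsI maps + c.2) (c.1 * colsI maps + c.2 + 1) else p1) x =
            findP (if c.2 + 1 < colsI maps ∧ cellChar maps c.1 (c.2 + 1) ≠ 'X' then
              unionP p1 (c.1 * colsI maps + c.2) (c.1 * colsI maps + c.2 + 1) else p1) y) ∧
        (c.2 + 1 < colsI maps → cellChar maps c.1 (c.2 + 1) ≠ 'X' →
          findP (if c.2 + 1 < colsI maps ∧ cellChar maps c.1 (c.2 + 1) ≠ 'X' then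
              unionP p1 (c.1 * colsI maps + c.2) (c.1 * colsI maps + c.2 + 1) else p1)
            (idxI maps c) =
          findP (if c.2 + 1 < colsI maps ∧ cellChar maps c.1 (c.2 + 1) ≠ 'X' then
              unionP p1 (c.1 * colsI maps + c.2) (c.1 * colsI maps + c.2 + 1) else p1)
            (idxI maps (c.1, c.2 + 1))) := by
      by_cases hrc : c.2 + 1 < colsI maps ∧ cellChar maps c.1 (c.2 + 1) ≠ 'X'
      · have hgd : ((c.1, c.2 + 1) : Int × Int) ∈ gridF maps := by
          rw [mem_gridF]; exact ⟨hg1, hg2, by omega, hrc.1⟩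
        have hokd : okC maps (c.1, c.2 + 1) := ⟨hg1, hg2, by omega, hrc.1, hrc.2⟩
        have hcd : connIdx maps (idxI maps c) (idxI maps (c.1, c.2 + 1)) :=
          Or.inr ⟨c, (c.1, c.2 + 1), hokc, hokd,
            Relation.ReflTransGen.single ⟨hokc, hokd, Or.inl ⟨rfl, Or.inl rfl⟩⟩, rfl, rfl⟩
        have he1 : c.1 * colsI maps + c.2 = idxI maps c := rfl
        have he3 : c.1 * colsI maps + c.2 + 1 = idxI maps (c.1, c.2 + 1) := by
          unfold idxI; ring
        rw [if_pos hrc, he3, he1]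
        obtain ⟨u1, u2, u3⟩ := union_spec I1 (idx_bounds hc) (idx_bounds hgd) hcd
        exact ⟨u1, u2, fun _ _ => u3⟩
      · rw [if_neg hrc]
        exact ⟨I1, fun _ _ _ _ _ _ h => h, fun h1 h2 => absurd ⟨h1, h2⟩ hrc⟩
    obtain ⟨I2, P2, E2⟩ := step2
    have hcell : uCell maps p c.1 c.2 =
        (if c.2 + 1 < colsI maps ∧ cellChar maps c.1 (c.2 + 1) ≠ 'X' then
          unionP p1 (c.1 * colsI maps + c.2) (c.1 * colsI maps + c.2 + 1) else p1) := by
      unfold uCell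
      rw [if_pos hX, hp1]
    rw [hcell]
    have hgrid_down : c.1 + 1 < rowsI maps → ((c.1 + 1, c.2) : Int × Int) ∈ gridF maps := by
      intro h; rw [mem_gridF]; exact ⟨by omega, h, hg3, hg4⟩
    refine ⟨I2, fun x y hx0 hxn hy0 hyn h => P2 x y hx0 hxn hy0 hyn
      (P1 x y hx0 hxn hy0 hyn h), ?_, fun _ => E2⟩
    intro _ h1 h2
    have hbd := idx_bounds (hgrid_down h1)
    exact P2 _ _ hidc.1 hidc.2 hbd.1 hbd.2 (E1 h1 h2)
  · have hcell : uCell maps p c.1 c.2 = p := by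
      unfold uCell
      rw [if_neg hX]
    rw [hcell]
    exact ⟨hInv, fun _ _ _ _ _ _ h => h,
      fun h _ _ => absurd h hX, fun h _ _ => absurd h hX⟩

lemma fold_pres (maps : List String) :
    ∀ (cs : List (Int × Int)) (p : List Int), (∀ c ∈ cs, c ∈ gridF maps) → InvP maps p →
      InvP maps (cs.foldl (fun p c => uCell maps p c.1 c.2) p) ∧
      (∀ x y, 0 ≤ x → x < nTot maps → 0 ≤ y → y < nTot maps →
        findP p x = findP p y →
        findP (cs.foldl (fun p c => uCell maps p c.1 c.2) p) x =
          findP (cs.foldl (fun p c => uCell maps p c.1 c.2) p) y) := by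
  intro cs
  induction cs with
  | nil => exact fun p _ hp => ⟨hp, fun _ _ _ _ _ _ h => h⟩
  | cons c cs ih =>
    intro p hcs hp
    obtain ⟨I1, P1, -, -⟩ := uCell_spec maps hp (hcs c List.mem_cons_self)
    obtain ⟨I2, P2⟩ := ih (uCell maps p c.1 c.2) (fun d hd => hcs d (List.mem_cons_of_mem _ hd)) I1
    exact ⟨I2, fun x y hx0 hxn hy0 hyn h =>
      P2 x y hx0 hxn hy0 hyn (P1 x y hx0 hxn hy0 hyn h)⟩

lemma fold_edge (maps : List String) :
    ∀ (cs : List (Int × Int)) (p : List Int), (∀ c ∈ cs, c ∈ gridF maps) → InvP maps p →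
      ∀ c ∈ cs,
      (cellChar maps c.1 c.2 ≠ 'X' → c.1 + 1 < rowsI maps → cellChar maps (c.1 + 1) c.2 ≠ 'X' →
        findP (cs.foldl (fun p c => uCell maps p c.1 c.2) p) (idxI maps c) =
          findP (cs.foldl (fun p c => uCell maps p c.1 c.2) p) (idxI maps (c.1 + 1, c.2))) ∧
      (cellChar maps c.1 c.2 ≠ 'X' → c.2 + 1 < colsI maps → cellChar maps c.1 (c.2 + 1) ≠ 'X' →
        findP (cs.foldl (fun p c => uCell maps p c.1 c.2) p) (idxI maps c) =
          findP (cs.foldl (fun p c => uCell maps p c.1 c.2) p) (idxI maps (c.1, c.2 + 1))) := by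
  intro cs
  induction cs with
  | nil => intro p _ _ c hc; simp at hc
  | cons c' cs ih =>
    intro p hcs hp c hc
    have hc'g := hcs c' List.mem_cons_self
    obtain ⟨I1, P1, E1d, E1r⟩ := uCell_spec maps hp hc'g
    have htail := fun d hd => hcs d (List.mem_cons_of_mem _ hd)
    rcases List.mem_cons.1 hc with rfl | hmem
    · obtain ⟨-, Pf⟩ := fold_pres maps cs (uCell maps p c.1 c.2) htail I1
      obtain ⟨hg1, hg2, hg3, hg4⟩ := (mem_gridF maps c).1 hc'g
      have hidc := idx_bounds hc'g
      constructor
      · intro h1 h2 h3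
        have hbd' := idx_bounds (c := (c.1 + 1, c.2))
          (by rw [mem_gridF]; exact ⟨by omega, h2, hg3, hg4⟩)
        exact Pf _ _ hidc.1 hidc.2 hbd'.1 hbd'.2 (E1d h1 h2 h3)
      · intro h1 h2 h3
        have hbd' := idx_bounds (c := (c.1, c.2 + 1))
          (by rw [mem_gridF]; exact ⟨hg1, hg2, by omega, h2⟩)
        exact Pf _ _ hidc.1 hidc.2 hbd'.1 hbd'.2 (E1r h1 h2 h3)
    · exact ih (uCell maps p c'.1 c'.2) htail I1 c hmem

lemma inv_init (maps : List String) : InvP maps (PySem.List.pyRange 0 (nTot maps) 1) := by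
  constructor
  · simp [PySem.List.length_pyRange_one]
  · intro k hk
    refine ⟨(k : Int), ?_, by positivity, le_refl _, Or.inl rfl⟩
    rw [PySem.List.getElem?_pyRange_one]
    simp only [sub_zero]
    rw [if_pos hk]
    simp

lemma parentFinal_eq (maps : List String) :
    parentFinal maps =
      (cells maps).foldl (fun p c => uCell maps p c.1 c.2) (PySem.List.pyRange 0 (nTot maps) 1) := by
  unfold parentFinal cells
  exact flatten_fold _ _ _ _

-- the characterisation: equal roots = connected land cells
lemma rtEq (maps : List String) : ∀ c d, okC maps c → okC maps d →
    (findP (parentFinal maps) (idxI maps c) = findP (parentFinal maps) (idxI maps d) ↔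
      Conn maps c d) := by
  have hcells : ∀ z ∈ cells maps, z ∈ gridF maps := fun z hz => mem_cells.1 hz
  obtain ⟨hInvF, -⟩ :=
    fold_pres maps (cells maps) (PySem.List.pyRange 0 (nTot maps) 1) hcells (inv_init maps)
  rw [← parentFinal_eq] at hInvF
  have hlenF : (parentFinal maps).length = (nTot maps).toNat := hInvF.1
  -- an adjacent pair of land cells has equal roots
  have hadj : ∀ e f : Int × Int, okC maps e → okC maps f → adjC e f →
      findP (parentFinal maps) (idxI maps e) = findP (parentFinal maps) (idxI maps f) := by
    intro e f hoke hokf ha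
    have hedge := fold_edge maps (cells maps) (PySem.List.pyRange 0 (nTot maps) 1)
      hcells (inv_init maps)
    rw [← parentFinal_eq] at hedge
    have hee : e ∈ cells maps := mem_cells.2 (okC_mem_gridF hoke)
    have hff : f ∈ cells maps := mem_cells.2 (okC_mem_gridF hokf)
    rcases ha with ⟨h1, h2 | h2⟩ | ⟨h1, h2 | h2⟩
    · -- f = (e.1, e.2 + 1)
      have hf : f = (e.1, e.2 + 1) := Prod.ext h1 h2
      subst hf
      exact (hedge e hee).2 hoke.2.2.2.2 hokf.2.2.2.1 hokf.2.2.2.2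
    · -- f = (e.1, e.2 - 1) : apply the rule at f
      have he : e = (f.1, f.2 + 1) := Prod.ext h1.symm (by omega)
      have hc1 : f.2 + 1 < colsI maps := by
        have := hoke.2.2.2.1; omega
      have hc2 : cellChar maps f.1 (f.2 + 1) ≠ 'X' := by
        rw [h1, show f.2 + 1 = e.2 by omega]
        exact hoke.2.2.2.2
      rw [he]
      exact ((hedge f hff).2 hokf.2.2.2.2 hc1 hc2).symm
    · -- f = (e.1 + 1, e.2)
      have hf : f = (e.1 + 1, e.2) := Prod.ext h2 h1
      subst hf
      exact (hedge e hee).1 hoke.2.2.2.2 hokf.2.1 hokf.2.2.2.2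
    · have he : e = (f.1 + 1, f.2) := Prod.ext (by omega) h1.symm
      have hc1 : f.1 + 1 < rowsI maps := by
        have := hoke.2.1; omega
      have hc2 : cellChar maps (f.1 + 1) f.2 ≠ 'X' := by
        rw [h1, show f.1 + 1 = e.1 by omega]
        exact hoke.2.2.2.2
      rw [he]
      exact ((hedge f hff).1 hokf.2.2.2.2 hc1 hc2).symm
  intro c d hokc hokd
  constructor
  · -- soundness
    intro h
    have hic := idx_bounds (okC_mem_gridF hokc)
    have hid := idx_bounds (okC_mem_gridF hokd)
    obtain ⟨-, -, -, -, hc5⟩ :=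
      find_spec hInvF (parentFinal maps).length (idxI maps c) hic.1 hic.2 (by omega)
    obtain ⟨-, -, -, -, hd5⟩ :=
      find_spec hInvF (parentFinal maps).length (idxI maps d) hid.1 hid.2 (by omega)
    have h' : findFuel (parentFinal maps) (parentFinal maps).length (idxI maps c) =
        findFuel (parentFinal maps) (parentFinal maps).length (idxI maps d) := h
    rw [h'] at hc5
    exact connIdx_conn hokc hokd (connIdx_trans (connIdx_symm hc5) hd5)
  · -- completeness
    intro h
    clear hokd
    induction h with
    | refl => rfl
    | tail hcb hstep ih => exact ih.trans (hadj _ _ hstep.1 hstep.2.1 hstep.2.2)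

-- ---- B's dict fold produces the leader sums ----
lemma B_scan (maps : List String) (pf : List Int)
    (hrt : ∀ c d, okC maps c → okC maps d →
      (findP pf (idxI maps c) = findP pf (idxI maps d) ↔ Conn maps c d)) :
    ∀ (cs : List (Int × Int)), (∀ c ∈ cs, c ∈ gridF maps) → cs.Nodup →
    ∀ (seen L : List (Int × Int)) (D : PySem.Dict Int Int),
      (∀ d ∈ seen, okC maps d) →
      (∀ c ∈ cs, c ∉ seen) →
      (∀ ℓ ∈ L, okC maps ℓ) →
      L.Pairwise (fun a b => ¬ Conn maps a b) →
      (∀ ℓ ∈ L, ℓ ∈ seen) →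
      (∀ d ∈ seen, ∃ ℓ ∈ L, Conn maps ℓ d) →
      D.items = L.map (fun ℓ => (findP pf (idxI maps ℓ),
        ∑ z ∈ compF maps ℓ ∩ seen.toFinset, valAt maps z.1 z.2)) →
      (cs.foldl (fun d c => sCell maps pf d c.1 c.2) D).items =
        (L ++ leadAux maps seen cs).map (fun ℓ => (findP pf (idxI maps ℓ),
          ∑ z ∈ compF maps ℓ ∩ (seen.toFinset ∪ cs.toFinset), valAt maps z.1 z.2)) := by
  intro cs
  induction cs with
  | nil =>
    intro _ _ seen L D _ _ _ _ _ _ hitems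
    simpa [leadAux] using hitems
  | cons c t ih =>
    obtain ⟨x, y⟩ := c
    intro hcs hnd seen L D hsok hnew hLok hLpair hLseen hseencov hitems
    have hcg : ((x, y) : Int × Int) ∈ gridF maps := hcs _ List.mem_cons_self
    have htail := fun d hd => hcs d (List.mem_cons_of_mem _ hd)
    have hndt : t.Nodup := (List.nodup_cons.1 hnd).2
    have hct : ((x, y) : Int × Int) ∉ t := (List.nodup_cons.1 hnd).1
    have hcs_seen : ((x, y) : Int × Int) ∉ seen := hnew _ List.mem_cons_self
    have hSeq : (((x, y) :: seen : List (Int × Int)).toFinset ∪ t.toFinset) =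
        (seen.toFinset ∪ (((x, y) :: t : List (Int × Int))).toFinset) := by
      ext z
      simp only [List.toFinset_cons, Finset.mem_union, Finset.mem_insert]
      tauto
    simp only [List.foldl_cons]
    by_cases hok : okC maps (x, y)
    · have hconn_symm : Symmetric (fun a b : Int × Int => ¬ Conn maps a b) :=
        fun a b h hc => h (conn_symm hc)
      have hforall := List.Pairwise.forall hconn_symm hLpair
      have hkeys : D.keys = L.map (fun ℓ => findP pf (idxI maps ℓ)) := by
        simp only [PySem.Dict.keys, hitems, List.map_map]
        rfl
      have hLpairNe : L.Pairwise (fun a b => findP pf (idxI maps a) ≠ findP pf (idxI maps b)) :=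
        hLpair.imp_of_mem (fun {a b} ha hb hnc heq =>
          hnc ((hrt a b (hLok a ha) (hLok b hb)).1 heq))
      have hknd : D.keys.Nodup := by
        rw [hkeys]
        exact List.Pairwise.map _ (fun a b h => h) hLpairNe
      have hmemkeys : findP pf (idxI maps (x, y)) ∈ D.keys ↔
          ∃ ℓ ∈ L, Conn maps ℓ (x, y) := by
        rw [hkeys]
        simp only [List.mem_map]
        constructor
        · rintro ⟨ℓ, hℓ, heq⟩
          exact ⟨ℓ, hℓ, (hrt ℓ (x, y) (hLok ℓ hℓ) hok).1 heq⟩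
        · rintro ⟨ℓ, hℓ, hc⟩
          exact ⟨ℓ, hℓ, (hrt ℓ (x, y) (hLok ℓ hℓ) hok).2 hc⟩
      have hchar : cellChar maps x y ≠ 'X' := hok.2.2.2.2
      have hstep : sCell maps pf D x y =
          D.insert (findP pf (idxI maps (x, y)))
            (D.getD (findP pf (idxI maps (x, y))) 0 + valAt maps x y) := by
        unfold sCell
        rw [if_pos hchar]
        rfl
      by_cases hexd : ∃ d ∈ seen, Conn maps d (x, y)
      · -- the cell joins an island already keyed in the dict
        have hexL : ∃ ℓ ∈ L, Conn maps ℓ (x, y) := by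
          obtain ⟨d, hd, hdc⟩ := hexd
          obtain ⟨ℓ, hℓ, hℓd⟩ := hseencov d hd
          exact ⟨ℓ, hℓ, conn_trans hℓd hdc⟩
        obtain ⟨ℓ0, hℓ0L, hℓ0c⟩ := hexL
        have hrteq : findP pf (idxI maps ℓ0) = findP pf (idxI maps (x, y)) :=
          (hrt ℓ0 (x, y) (hLok ℓ0 hℓ0L) hok).2 hℓ0c
        have hcont : D.contains (findP pf (idxI maps (x, y))) = true := by
          rw [PySem.Dict.contains_eq_decide_mem_keys, decide_eq_true_eq, hmemkeys]
          exact ⟨ℓ0, hℓ0L, hℓ0c⟩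
        have hmem_item : (findP pf (idxI maps ℓ0),
            ∑ z ∈ compF maps ℓ0 ∩ seen.toFinset, valAt maps z.1 z.2) ∈ D.items := by
          rw [hitems]
          exact List.mem_map.2 ⟨ℓ0, hℓ0L, rfl⟩
        have hgetD : D.getD (findP pf (idxI maps (x, y))) 0 =
            ∑ z ∈ compF maps ℓ0 ∩ seen.toFinset, valAt maps z.1 z.2 := by
          rw [← hrteq]
          exact PySem.Dict.getD_of_mem_items D hmem_item hknd 0
        have hitems' : (D.insert (findP pf (idxI maps (x, y)))
            (D.getD (findP pf (idxI maps (x, y))) 0 + valAt maps x y)).items =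
            L.map (fun ℓ => (findP pf (idxI maps ℓ),
              ∑ z ∈ compF maps ℓ ∩ (((x, y) :: seen : List (Int × Int)).toFinset),
                valAt maps z.1 z.2)) := by
          rw [PySem.Dict.items_insert_of_contains D _ hcont, hitems, List.map_map]
          refine List.map_congr_left ?_
          intro ℓ hℓ
          simp only [Function.comp_apply, List.toFinset_cons]
          by_cases hcℓ : Conn maps ℓ (x, y)
          · have hℓeq : ℓ = ℓ0 := by
              by_contra hne
              exact hforall hℓ hℓ0L hne (conn_trans hcℓ (conn_symm hℓ0c))
            subst hℓeq
            rw [if_pos (by simp [hrteq]), hgetD]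
            have hcin : ((x, y) : Int × Int) ∈ compF maps ℓ :=
              (mem_compF (hLok ℓ hℓ0L)).2 hcℓ
            have hinter : compF maps ℓ ∩ insert (x, y) seen.toFinset =
                insert (x, y) (compF maps ℓ ∩ seen.toFinset) := by
              ext z
              simp only [Finset.mem_inter, Finset.mem_insert]
              constructor
              · rintro ⟨h1, rfl | h2⟩
                · exact Or.inl rfl
                · exact Or.inr ⟨h1, h2⟩
              · rintro (rfl | ⟨h1, h2⟩)
                · exact ⟨hcin, Or.inl rfl⟩
                · exact ⟨h1, Or.inr h2⟩
            have hnotin : ((x, y) : Int × Int) ∉ compF maps ℓ ∩ seen.toFinset := by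
              simp only [Finset.mem_inter, List.mem_toFinset]
              rintro ⟨-, h2⟩
              exact hcs_seen h2
            rw [hinter, Finset.sum_insert hnotin, ← hrteq]
            simp [add_comm]
          · have hne : findP pf (idxI maps ℓ) ≠ findP pf (idxI maps (x, y)) :=
              fun heq => hcℓ ((hrt ℓ (x, y) (hLok ℓ hℓ) hok).1 heq)
            rw [if_neg (by simpa using hne)]
            have hinter : compF maps ℓ ∩ insert (x, y) seen.toFinset =
                compF maps ℓ ∩ seen.toFinset := by
              ext z
              simp only [Finset.mem_inter, Finset.mem_insert]
              constructor
              · rintro ⟨h1, rfl | h2⟩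
                · exact absurd ((mem_compF (hLok ℓ hℓ)).1 h1) hcℓ
                · exact ⟨h1, h2⟩
              · rintro ⟨h1, h2⟩
                exact ⟨h1, Or.inr h2⟩
            rw [hinter]
        have ihres := ih htail hndt ((x, y) :: seen) L _
          (fun d hd => by rcases List.mem_cons.1 hd with rfl | hd'; exacts [hok, hsok d hd'])
          (fun c' hc' => by
            rintro hmem
            rcases List.mem_cons.1 hmem with rfl | hmem'
            · exact hct hc'
            · exact hnew c' (List.mem_cons_of_mem _ hc') hmem')
          hLok hLpair
          (fun ℓ hℓ => List.mem_cons_of_mem _ (hLseen ℓ hℓ))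
          (fun d hd => by
            rcases List.mem_cons.1 hd with rfl | hd'
            · exact ⟨ℓ0, hℓ0L, hℓ0c⟩
            · exact hseencov d hd')
          hitems'
        rw [hstep, ihres, leadAux_cons_old hok hexd, hSeq]
      · -- a new island: the key is fresh, the dict appends
        have hexL : ¬ ∃ ℓ ∈ L, Conn maps ℓ (x, y) := by
          rintro ⟨ℓ, hℓ, hc⟩
          exact hexd ⟨ℓ, hLseen ℓ hℓ, hc⟩
        have hcont : D.contains (findP pf (idxI maps (x, y))) = false := by
          rw [PySem.Dict.contains_eq_decide_mem_keys, decide_eq_false_iff_not, hmemkeys]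
          exact hexL
        have hgetD : D.getD (findP pf (idxI maps (x, y))) 0 = 0 :=
          PySem.Dict.getD_of_not_contains D 0 hcont
        have hitems' : (D.insert (findP pf (idxI maps (x, y)))
            (D.getD (findP pf (idxI maps (x, y))) 0 + valAt maps x y)).items =
            (L ++ [((x, y) : Int × Int)]).map (fun ℓ => (findP pf (idxI maps ℓ),
              ∑ z ∈ compF maps ℓ ∩ (((x, y) :: seen : List (Int × Int)).toFinset),
                valAt maps z.1 z.2)) := by
          rw [PySem.Dict.items_insert_of_not_contains D _ hcont, hitems, List.map_append,
            hgetD, zero_add]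
          congr 1
          · refine List.map_congr_left ?_
            intro ℓ hℓ
            simp only [List.toFinset_cons]
            have hinter : compF maps ℓ ∩ insert (x, y) seen.toFinset =
                compF maps ℓ ∩ seen.toFinset := by
              ext z
              simp only [Finset.mem_inter, Finset.mem_insert]
              constructor
              · rintro ⟨h1, rfl | h2⟩
                · exact absurd ⟨ℓ, hℓ, (mem_compF (hLok ℓ hℓ)).1 h1⟩ hexL
                · exact ⟨h1, h2⟩
              · rintro ⟨h1, h2⟩
                exact ⟨h1, Or.inr h2⟩
            rw [hinter]
          · simp only [List.map_cons, List.map_nil, List.toFinset_cons]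
            have hinter : compF maps (x, y) ∩ insert (x, y) seen.toFinset =
                {((x, y) : Int × Int)} := by
              ext z
              simp only [Finset.mem_inter, Finset.mem_insert, Finset.mem_singleton,
                List.mem_toFinset]
              constructor
              · rintro ⟨h1, rfl | h2⟩
                · rfl
                · exfalso
                  obtain ⟨ℓ, hℓ, hℓz⟩ := hseencov z h2
                  exact hexL ⟨ℓ, hℓ, conn_trans hℓz (conn_symm ((mem_compF hok).1 h1))⟩
              · rintro rfl
                exact ⟨(mem_compF hok).2 Relation.ReflTransGen.refl, Or.inl rfl⟩
            rw [hinter, Finset.sum_singleton]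
        have ihres := ih htail hndt ((x, y) :: seen) (L ++ [(x, y)]) _
          (fun d hd => by rcases List.mem_cons.1 hd with rfl | hd'; exacts [hok, hsok d hd'])
          (fun c' hc' => by
            rintro hmem
            rcases List.mem_cons.1 hmem with rfl | hmem'
            · exact hct hc'
            · exact hnew c' (List.mem_cons_of_mem _ hc') hmem')
          (fun ℓ hℓ => by
            rcases List.mem_append.1 hℓ with h | h
            · exact hLok ℓ h
            · obtain rfl := List.mem_singleton.1 h
              exact hok)
          (by
            rw [List.pairwise_append]
            refine ⟨hLpair, List.pairwise_singleton _ _, ?_⟩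
            intro ℓ hℓ c' hc' hc
            obtain rfl := List.mem_singleton.1 hc'
            exact hexL ⟨ℓ, hℓ, hc⟩)
          (fun ℓ hℓ => by
            rcases List.mem_append.1 hℓ with h | h
            · exact List.mem_cons_of_mem _ (hLseen ℓ h)
            · obtain rfl := List.mem_singleton.1 h
              exact List.mem_cons_self)
          (fun d hd => by
            rcases List.mem_cons.1 hd with rfl | hd'
            · exact ⟨(x, y), List.mem_append.2 (Or.inr (List.mem_singleton.2 rfl)),
                Relation.ReflTransGen.refl⟩
            · obtain ⟨ℓ, hℓ, hc⟩ := hseencov d hd'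
              exact ⟨ℓ, List.mem_append.2 (Or.inl hℓ), hc⟩)
          hitems'
        rw [hstep, ihres, leadAux_cons_new hok hexd, hSeq]
        simp [List.append_assoc]
    · -- a sea cell: the dict is unchanged and no component contains it
      have hchar : ¬ cellChar maps x y ≠ 'X' := by
        obtain ⟨g1, g2, g3, g4⟩ := (mem_gridF maps (x, y)).1 hcg
        intro h'
        exact hok ⟨g1, g2, g3, g4, h'⟩
      have hstep : sCell maps pf D x y = D := by
        unfold sCell
        rw [if_neg hchar]
      have ihres := ih htail hndt seen L D hsok
        (fun c' hc' => hnew c' (List.mem_cons_of_mem _ hc')) hLok hLpair hLseen hseencov hitems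
      rw [hstep, ihres, leadAux_cons_notok hok]
      refine List.map_congr_left ?_
      intro ℓ hℓ
      have hokℓ : okC maps ℓ := by
        rcases List.mem_append.1 hℓ with h | h
        · exact hLok ℓ h
        · exact leadAux_ok _ _ _ h
      have hinter : compF maps ℓ ∩ (seen.toFinset ∪ t.toFinset) =
          compF maps ℓ ∩ (seen.toFinset ∪ (((x, y) :: t : List (Int × Int))).toFinset) := by
        ext z
        simp only [Finset.mem_inter, Finset.mem_union, List.toFinset_cons, Finset.mem_insert]
        constructor
        · rintro ⟨h1, h2 | h2⟩
          · exact ⟨h1, Or.inl h2⟩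
          · exact ⟨h1, Or.inr (Or.inr h2)⟩
        · rintro ⟨h1, h2 | rfl | h2⟩
          · exact ⟨h1, Or.inl h2⟩
          · exact absurd (conn_ok_end ((mem_compF hokℓ).1 h1) hokℓ) hok
          · exact ⟨h1, Or.inr h2⟩
      rw [hinter]

-- ---- assembly ----
lemma sol_eq (maps : List String) : solution maps = solution_alt maps := by
  have hcells : ∀ z ∈ cells maps, z ∈ gridF maps := fun z hz => mem_cells.1 hz
  -- A's double scan, flattened and evaluated
  have h1 : ((PySem.List.pyRange 0 (rowsI maps) 1).foldl (rowA maps)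
      (([] : List Int), List.replicate maps.length
        (List.replicate (maps.headD "").toList.length 0))) =
      ((cells maps).foldl (fun st c => stepA maps c.1 st c.2)
        (([] : List Int), List.replicate maps.length
          (List.replicate (maps.headD "").toList.length 0))) :=
    flatten_fold _ _ (fun st i j => stepA maps i st j) _
  have hA : ((PySem.List.pyRange 0 (rowsI maps) 1).foldl (rowA maps)
      (([] : List Int), List.replicate maps.length
        (List.replicate (maps.headD "").toList.length 0))).1 =
      (leadAux maps [] (cells maps)).map (csum maps) := by
    rw [h1]
    have hres := A_scan maps (cells maps) hcells []
      (List.replicate maps.length (List.replicate (maps.headD "").toList.length 0)) []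
      (by
        intro z
        rw [gsetV_init maps]
        simp)
      (by simp)
    simpa using hres
  -- B's union-find characterisation and dict scan, flattened and evaluated
  have hrt := rtEq maps
  have h2 : ((PySem.List.pyRange 0 (rowsI maps) 1).foldl
      (fun d i => (PySem.List.pyRange 0 (colsI maps) 1).foldl
        (fun d j => sCell maps (parentFinal maps) d i j) d)
      (PySem.Dict.empty : PySem.Dict Int Int)) =
      ((cells maps).foldl (fun d c => sCell maps (parentFinal maps) d c.1 c.2)
        PySem.Dict.empty) :=
    flatten_fold _ _ (fun d i j => sCell maps (parentFinal maps) d i j) _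
  have hB := B_scan maps (parentFinal maps) hrt (cells maps) hcells (cells_nodup maps)
    [] [] PySem.Dict.empty (by simp) (by simp) (by simp) List.Pairwise.nil
    (by simp) (by simp) rfl
  have hsub : ∀ ℓ : Int × Int,
      compF maps ℓ ∩ ((([] : List (Int × Int))).toFinset ∪ (cells maps).toFinset) =
        compF maps ℓ := by
    intro ℓ
    apply Finset.inter_eq_left.2
    intro z hz
    have hzg : z ∈ gridF maps := by
      unfold compF at hz
      exact (@Finset.mem_filter _ _ (Classical.decPred _) _ _ |>.1 hz).1
    simp only [List.toFinset_nil, Finset.empty_union, List.mem_toFinset]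
    exact mem_cells.2 hzg
  have hBvals : ((PySem.List.pyRange 0 (rowsI maps) 1).foldl
      (fun d i => (PySem.List.pyRange 0 (colsI maps) 1).foldl
        (fun d j => sCell maps (parentFinal maps) d i j) d)
      (PySem.Dict.empty : PySem.Dict Int Int)).values =
      (leadAux maps [] (cells maps)).map (csum maps) := by
    rw [h2]
    simp only [PySem.Dict.values, hB, List.map_map, List.nil_append]
    refine List.map_congr_left ?_
    intro ℓ _
    simp only [Function.comp_apply, hsub ℓ]
    rfl
  simp only [solution, solution_alt]
  rw [hA, hBvals]

-- ===== VERDICT (by name: the statement is the Claim_ definition above) =====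
theorem solution_spec : Claim_equal_solution := by
  intro maps _ _
  unfold Spec_solution
  exact sol_eq maps
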